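-- pv_equiv track=rewrite | github.com/jjoshua2/arc_agi | unsolved/2025-10-11T04-29-28Z/50846271_best1.py | transform
-- ===== SOURCE A (Python) =====
-- from collections import deque, defaultdict
--
-- def transform(grid_lst: list[list[int]]) -> list[list[int]]:
--     if not grid_lst or not grid_lst[0]:
--         return grid_lst
--
--     rows = len(grid_lst)
--     cols = len(grid_lst[0])
--
--     # Work on a copy for output
--     out = [row[:] for row in grid_lst]
--
--     # Determine background color (corner)
--     background = grid_lst[0][0]
--
--     # Count colors to pick rectangle color (most common excluding background)
--     counts = defaultdict(int)
--     for r in range(rows):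
--         for c in range(cols):
--             counts[grid_lst[r][c]] += 1
--
--     rect_color = None
--     max_count = -1
--     for color, cnt in counts.items():
--         if color == background:
--             continue
--         if cnt > max_count:
--             max_count = cnt
--             rect_color = color
--
--     if rect_color is None:
--         return out
--
--     # Find connected components of rect_color
--     visited = [[False]*cols for _ in range(rows)]
--     dirs = [(-1,0),(1,0),(0,-1),(0,1)]
--     components = []  # list of lists of (r,c)
--
--     for r in range(rows):
--         for c in range(cols):
--             if not visited[r][c] and grid_lst[r][c] == rect_color:
--                 q = deque()
--                 q.append((r,c))
--                 visited[r][c] = True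
--                 comp = []
--                 while q:
--                     x,y = q.popleft()
--                     comp.append((x,y))
--                     for dx,dy in dirs:
--                         nx, ny = x+dx, y+dy
--                         if 0 <= nx < rows and 0 <= ny < cols and (not visited[nx][ny]) and grid_lst[nx][ny] == rect_color:
--                             visited[nx][ny] = True
--                             q.append((nx, ny))
--                 components.append(comp)
--
--     # For each component, compute bounding box and, if big enough, draw cross of purple(8)
--     for comp in components:
--         minr = min(r for r,c in comp)
--         maxr = max(r for r,c in comp)
--         minc = min(c for r,c in comp)
--         maxc = max(c for r,c in comp)
--
--         # Require a bounding box at least 3x3 (so it has a clear center row/col)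
--         if (maxr - minr) >= 2 and (maxc - minc) >= 2:
--             rc = (minr + maxr) // 2
--             cc = (minc + maxc) // 2
--
--             comp_set = set(comp)
--
--             # Horizontal center row: set rect_color cells in component to 8
--             for ccx in range(minc, maxc + 1):
--                 if (rc, ccx) in comp_set and grid_lst[rc][ccx] == rect_color:
--                     out[rc][ccx] = 8
--
--             # Vertical center column: set rect_color cells in component to 8
--             for rrr in range(minr, maxr + 1):
--                 if (rrr, cc) in comp_set and grid_lst[rrr][cc] == rect_color:
--                     out[rrr][cc] = 8
--
--     return out
-- ===== SOURCE B (Python) =====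
-- def transform(grid_lst: list[list[int]]) -> list[list[int]]:
--     if not grid_lst or not grid_lst[0]:
--         return grid_lst
--
--     rows = len(grid_lst)
--     cols = len(grid_lst[0])
--
--     background = grid_lst[0][0]
--
--     counts = {}
--     for r in range(rows):
--         for c in range(cols):
--             v = grid_lst[r][c]
--             counts[v] = counts.get(v, 0) + 1
--
--     rect_color = None
--     max_count = -1
--     for color, cnt in counts.items():
--         if color == background:
--             continue
--         if cnt > max_count:
--             max_count = cnt
--             rect_color = color
--
--     if rect_color is None:
--         return [row[:] for row in grid_lst]
--
--     # Union-find over rect_color cells: one scan, union with up/left neighbours.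
--     parent = {}
--
--     def find(x):
--         while parent[x] != x:
--             x = parent[x]
--         return x
--
--     for r in range(rows):
--         for c in range(cols):
--             if grid_lst[r][c] != rect_color:
--                 continue
--             cur = (r, c)
--             parent[cur] = cur
--             if r > 0 and grid_lst[r - 1][c] == rect_color:
--                 ra, rb = find((r - 1, c)), find(cur)
--                 if ra != rb:
--                     parent[ra] = rb
--             if c > 0 and grid_lst[r][c - 1] == rect_color:
--                 ra, rb = find((r, c - 1)), find(cur)
--                 if ra != rb:
--                     parent[ra] = rb
--
--     # Bounding box per component root, aggregated in one scan.
--     info = {}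
--     for r in range(rows):
--         for c in range(cols):
--             if grid_lst[r][c] == rect_color:
--                 root = find((r, c))
--                 if root in info:
--                     minr, maxr, minc, maxc = info[root]
--                     info[root] = (min(minr, r), max(maxr, r), min(minc, c), max(maxc, c))
--                 else:
--                     info[root] = (r, r, c, c)
--
--     # Build the output cell-wise: a rect cell turns 8 iff it lies on the centre
--     # row or centre column of its component's bounding box and that box is >= 3x3.
--     out = []
--     for r in range(rows):
--         row = list(grid_lst[r])
--         for c in range(cols):
--             if grid_lst[r][c] == rect_color:
--                 minr, maxr, minc, maxc = info[find((r, c))]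
--                 if maxr - minr >= 2 and maxc - minc >= 2 and (r == (minr + maxr) // 2 or c == (minc + maxc) // 2):
--                     row[c] = 8
--         out.append(row)
--     return out
-- ===== Notes on version B (the rewrite author's own statement) =====
-- stated objective: alternative
-- what changed: The per-seed BFS flood fill with a shared visited matrix and per-component in-place cross drawing is replaced by a union-find scan (each rect cell unioned with its up/left rect neighbours), a per-root bounding-box aggregation pass, and a cell-wise rebuild of the output grid.
import Mathlib
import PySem

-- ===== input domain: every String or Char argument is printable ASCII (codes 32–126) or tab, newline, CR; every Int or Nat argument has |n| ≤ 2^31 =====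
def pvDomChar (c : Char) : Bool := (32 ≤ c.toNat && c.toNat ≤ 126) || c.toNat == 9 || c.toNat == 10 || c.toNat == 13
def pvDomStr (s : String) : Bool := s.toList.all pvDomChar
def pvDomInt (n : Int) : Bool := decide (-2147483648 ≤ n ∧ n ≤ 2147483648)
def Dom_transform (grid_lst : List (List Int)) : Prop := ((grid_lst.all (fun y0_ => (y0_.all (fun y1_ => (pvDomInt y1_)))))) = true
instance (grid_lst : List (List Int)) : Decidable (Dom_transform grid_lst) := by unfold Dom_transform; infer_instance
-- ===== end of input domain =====

-- B replaces A's per-seed BFS by a union-find scan plus per-root bounding boxes and a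
-- cell-wise rebuild of the grid (objective: alternative; A mutates no argument, nor does B).

-- shared helpers: grid_lst[r][c] (both Pythons index identically, always in range under Pre_)
def pvAt (g : List (List Int)) (r c : Int) : Int :=
  PySem.List.pyGetD (PySem.List.pyGetD g r []) c 0

-- counts loop (textually identical in A and B)
def pvCounts (g : List (List Int)) (rows cols : Int) : PySem.Dict Int Int :=
  (PySem.List.pyRange 0 rows 1).foldl (fun d r =>
    (PySem.List.pyRange 0 cols 1).foldl (fun d c =>
      d.modify (pvAt g r c) 0 (· + 1)) d) PySem.Dict.empty

-- rect_color/max_count selection loop (textually identical in A and B)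
def pvRectSel (items : List (Int × Int)) (background : Int) : Option Int × Int :=
  items.foldl (fun st kv =>
    if kv.1 = background then st
    else if kv.2 > st.2 then (some kv.1, kv.2) else st) (none, -1)

-- ===== PORT A =====
def pvVget (v : List (List Bool)) (r c : Int) : Bool :=
  PySem.List.pyGetD (PySem.List.pyGetD v r []) c false

def pvSet2 {α : Type} (xs : List (List α)) (r c : Int) (w : α) : List (List α) :=
  xs.set r.toNat ((xs.getD r.toNat []).set c.toNat w)

-- BFS while-loop of A (fuel-based; fuel is always sufficient, see lemmas)
def pvBfs (g : List (List Int)) (rows cols rect : Int) :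
    Nat → List (Int × Int) → List (List Bool) → List (Int × Int) →
    List (Int × Int) × List (List Bool)
  | 0, _, visited, comp => (comp, visited)
  | fuel + 1, q, visited, comp =>
    match q with
    | [] => (comp, visited)
    | (x, y) :: q =>
      let comp' := comp ++ [(x, y)]
      let st := [((-1 : Int), (0 : Int)), (1, 0), (0, -1), (0, 1)].foldl
        (fun (st : List (Int × Int) × List (List Bool)) d =>
          let nx := x + d.1
          let ny := y + d.2
          if 0 ≤ nx ∧ nx < rows ∧ 0 ≤ ny ∧ ny < cols ∧ pvVget st.2 nx ny = false ∧
              pvAt g nx ny = rect then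
            (st.1 ++ [(nx, ny)], pvSet2 st.2 nx ny true)
          else st) (q, visited)
      pvBfs g rows cols rect fuel st.1 st.2 comp'

-- outer scan collecting the components
def pvComponents (g : List (List Int)) (rows cols rect : Int) : List (List (Int × Int)) :=
  ((PySem.List.pyRange 0 rows 1).foldl (fun st r =>
    (PySem.List.pyRange 0 cols 1).foldl (fun (st : List (List Bool) × List (List (Int × Int))) c =>
      if pvVget st.1 r c = false ∧ pvAt g r c = rect then
        let res := pvBfs g rows cols rect ((rows * cols).toNat + 1) [(r, c)]
          (pvSet2 st.1 r c true) []
        (res.2, st.2 ++ [res.1])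
      else st) st)
    ((List.range rows.toNat).map (fun _ => (List.range cols.toNat).map (fun _ => false)), [])).2

-- per-component cross drawing of A
def pvDraw (g : List (List Int)) (rect : Int) (out : List (List Int))
    (comp : List (Int × Int)) : List (List Int) :=
  let minr := (PySem.List.min? (comp.map (·.1)) (fun x => x)).getD 0
  let maxr := (PySem.List.max? (comp.map (·.1)) (fun x => x)).getD 0
  let minc := (PySem.List.min? (comp.map (·.2)) (fun x => x)).getD 0
  let maxc := (PySem.List.max? (comp.map (·.2)) (fun x => x)).getD 0
  if maxr - minr ≥ 2 ∧ maxc - minc ≥ 2 then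
    let rc := PySem.Int.floordiv (minr + maxr) 2
    let cc := PySem.Int.floordiv (minc + maxc) 2
    let cset : PySem.Set (Int × Int) := PySem.Set.ofList comp
    let out1 := (PySem.List.pyRange minc (maxc + 1) 1).foldl (fun out ccx =>
      if (rc, ccx) ∈ cset ∧ pvAt g rc ccx = rect then pvSet2 out rc ccx 8 else out) out
    (PySem.List.pyRange minr (maxr + 1) 1).foldl (fun out rrr =>
      if (rrr, cc) ∈ cset ∧ pvAt g rrr cc = rect then pvSet2 out rrr cc 8 else out) out1
  else out

def transform (grid_lst : List (List Int)) : List (List Int) :=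
  if grid_lst = [] ∨ grid_lst.headD [] = [] then grid_lst
  else
    let rows : Int := grid_lst.length
    let cols : Int := (grid_lst.headD []).length
    let out := grid_lst.map (fun row => row)
    let background := pvAt grid_lst 0 0
    let counts := pvCounts grid_lst rows cols
    match (pvRectSel counts.items background).1 with
    | none => out
    | some rect =>
      (pvComponents grid_lst rows cols rect).foldl (pvDraw grid_lst rect) out

-- ===== PORT B =====
-- find: follow parent pointers to the root (fuel = dict size + 1, always sufficient)
def pvFindF (par : PySem.Dict (Int × Int) (Int × Int)) :
    Nat → (Int × Int) → (Int × Int)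
  | 0, x => x
  | fuel + 1, x =>
    let p := par.getD x x
    if p = x then x else pvFindF par fuel p

def pvFind (par : PySem.Dict (Int × Int) (Int × Int)) (x : Int × Int) : Int × Int :=
  pvFindF par (par.items.length + 1) x

-- union-find scan of B: insert each rect cell, union with up/left rect neighbours
def pvUnions (g : List (List Int)) (rows cols rect : Int) :
    PySem.Dict (Int × Int) (Int × Int) :=
  (PySem.List.pyRange 0 rows 1).foldl (fun par r =>
    (PySem.List.pyRange 0 cols 1).foldl (fun par c =>
      if pvAt g r c ≠ rect then par
      else
        let par1 := par.insert (r, c) (r, c)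
        let par2 :=
          if 0 < r ∧ pvAt g (r - 1) c = rect then
            let ra := pvFind par1 (r - 1, c)
            let rb := pvFind par1 (r, c)
            if ra ≠ rb then par1.insert ra rb else par1
          else par1
        if 0 < c ∧ pvAt g r (c - 1) = rect then
          let ra := pvFind par2 (r, c - 1)
          let rb := pvFind par2 (r, c)
          if ra ≠ rb then par2.insert ra rb else par2
        else par2) par) PySem.Dict.empty

-- bounding box per root, aggregated in one scan
def pvInfo (g : List (List Int)) (rows cols rect : Int)
    (par : PySem.Dict (Int × Int) (Int × Int)) :
    PySem.Dict (Int × Int) (Int × Int × Int × Int) :=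
  (PySem.List.pyRange 0 rows 1).foldl (fun info r =>
    (PySem.List.pyRange 0 cols 1).foldl (fun (info : PySem.Dict (Int × Int) (Int × Int × Int × Int)) c =>
      if pvAt g r c = rect then
        let root := pvFind par (r, c)
        match info.get? root with
        | some (a, b, d, e) => info.insert root (min a r, max b r, min d c, max e c)
        | none => info.insert root (r, r, c, c)
      else info) info) PySem.Dict.empty

def transform_alt (grid_lst : List (List Int)) : List (List Int) :=
  if grid_lst = [] ∨ grid_lst.headD [] = [] then grid_lst
  else
    let rows : Int := grid_lst.length
    let cols : Int := (grid_lst.headD []).length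
    let background := pvAt grid_lst 0 0
    let counts := pvCounts grid_lst rows cols
    match (pvRectSel counts.items background).1 with
    | none => grid_lst.map (fun row => row)
    | some rect =>
      let par := pvUnions grid_lst rows cols rect
      let info := pvInfo grid_lst rows cols rect par
      (PySem.List.pyRange 0 rows 1).foldl (fun out r =>
        let row := (PySem.List.pyRange 0 cols 1).foldl (fun row c =>
          if pvAt grid_lst r c = rect then
            let bb := info.getD (pvFind par (r, c)) (0, 0, 0, 0)
            if bb.2.1 - bb.1 ≥ 2 ∧ bb.2.2.2 - bb.2.2.1 ≥ 2 ∧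
                (r = PySem.Int.floordiv (bb.1 + bb.2.1) 2 ∨
                 c = PySem.Int.floordiv (bb.2.2.1 + bb.2.2.2) 2) then
              row.set c.toNat 8
            else row
          else row) (PySem.List.pyGetD grid_lst r [])
        out ++ [row]) []

-- ===== PRECONDITION & SPEC =====
-- Pre_ excludes exactly the ragged grids on which A raises IndexError: some row shorter
-- than row 0 (A indexes every row up to len(grid_lst[0])).
def Pre_transform (grid_lst : List (List Int)) : Prop :=
  ∀ row ∈ grid_lst, (grid_lst.headD []).length ≤ row.length
instance (grid_lst : List (List Int)) : Decidable (Pre_transform grid_lst) := by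
  unfold Pre_transform; infer_instance

def pvWitness_transform : List (List Int) :=
  [[0, 1, 1, 1], [0, 1, 1, 1], [0, 1, 1, 1]]

def Spec_transform (grid_lst : List (List Int)) (out : List (List Int)) : Prop :=
  out = transform_alt grid_lst
instance (grid_lst : List (List Int)) (out : List (List Int)) :
    Decidable (Spec_transform grid_lst out) := by unfold Spec_transform; infer_instance

-- ===== CLAIM (what is proved, stated in full; the proofs are below) =====
def Claim_equal_transform : Prop :=
  ∀ (grid_lst : List (List Int)), Dom_transform grid_lst → Pre_transform grid_lst →
    Spec_transform grid_lst (transform grid_lst)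

-- ===== LEMMAS AND PROOFS =====

-- Part 1: grid cell access and update -------------------------------------------------

-- cell access with Nat indices, used throughout the proofs
def pvCell (g : List (List Int)) (i j : Nat) : Int := (g.getD i []).getD j 0

theorem pyGetD_toNat {α : Type} (xs : List α) (i : Int) (d : α) (h : 0 ≤ i) :
    PySem.List.pyGetD xs i d = xs.getD i.toNat d := by
  by_cases hlt : i < (xs.length : Int)
  · rw [PySem.List.pyGetD_eq_getElem xs d h hlt]
    rw [List.getD_eq_getElem?_getD, List.getElem?_eq_getElem (by omega)]
    rfl
  · have h1 : xs.length ≤ i.toNat := by omega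
    rw [List.getD_eq_getElem?_getD, List.getElem?_eq_none (by omega)]
    simp only [PySem.List.pyGetD, PySem.List.pyGet?, PySem.List.pyIdx?]
    rw [if_pos h, if_neg hlt]
    rfl

theorem pvVget_eq (v : List (List Bool)) (r c : Int) (hr : 0 ≤ r) (hc : 0 ≤ c) :
    pvVget v r c = (v.getD r.toNat []).getD c.toNat false := by
  unfold pvVget
  rw [pyGetD_toNat _ _ _ hr, pyGetD_toNat _ _ _ hc]

theorem getD_set_list {α : Type} (xs : List α) (n : Nat) (w : α) (m : Nat) (d : α) :
    (xs.set n w).getD m d = if n = m ∧ n < xs.length then w else xs.getD m d := by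
  by_cases h : n = m ∧ n < xs.length
  · obtain ⟨rfl, h2⟩ := h
    rw [if_pos (And.intro rfl h2)]
    simp [List.getD_eq_getElem?_getD, h2]
  · rw [if_neg h]
    rcases Decidable.em (n = m) with rfl | hne
    · have h2 : ¬ n < xs.length := fun hh => h ⟨rfl, hh⟩
      rw [List.getD_eq_getElem?_getD, List.getD_eq_getElem?_getD,
        List.getElem?_eq_none (by simp [List.length_set]; omega), List.getElem?_eq_none (by omega)]
    · simp [List.getD_eq_getElem?_getD, List.getElem?_set_ne hne]

theorem length_pvSet2 {α : Type} (xs : List (List α)) (r c : Int) (w : α) :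
    (pvSet2 xs r c w).length = xs.length := by
  unfold pvSet2; simp

theorem getD_pvSet2_row {α : Type} (xs : List (List α)) (r c : Int) (w : α) (i : Nat) :
    ((pvSet2 xs r c w).getD i []).length = (xs.getD i []).length := by
  unfold pvSet2
  rw [getD_set_list]
  split_ifs with h
  · obtain ⟨rfl, _⟩ := h; simp
  · rfl

-- pointwise description of pvSet2 (indices written are in range)
theorem cell_pvSet2 (xs : List (List Int)) (r c : Int) (w : Int) (i j : Nat)
    (hr : 0 ≤ r) (hc : 0 ≤ c)
    (hrl : r < (xs.length : Int)) (hcl : c < ((xs.getD r.toNat []).length : Int)) :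
    pvCell (pvSet2 xs r c w) i j =
      if r.toNat = i ∧ c.toNat = j then w else pvCell xs i j := by
  unfold pvCell pvSet2
  rw [getD_set_list]
  by_cases hA : r.toNat = i ∧ r.toNat < xs.length
  · rw [if_pos hA, getD_set_list, hA.1]
    by_cases hj : c.toNat = j
    · have hB : c.toNat = j ∧ c.toNat < (xs.getD i []).length := ⟨hj, by rw [← hA.1]; omega⟩
      rw [if_pos hB, if_pos (And.intro rfl hj)]
    · rw [if_neg (fun h => hj h.1), if_neg (fun h => hj h.2)]
  · have hi : r.toNat ≠ i := fun h => hA ⟨h, by omega⟩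
    rw [if_neg hA, if_neg (fun h => hi h.1)]

-- same for Bool grids (visited)
theorem vget_pvSet2 (xs : List (List Bool)) (r c : Int) (w : Bool) (i j : Nat)
    (hr : 0 ≤ r) (hc : 0 ≤ c)
    (hrl : r < (xs.length : Int)) (hcl : c < ((xs.getD r.toNat []).length : Int)) :
    ((pvSet2 xs r c w).getD i []).getD j false =
      if r.toNat = i ∧ c.toNat = j then w else (xs.getD i []).getD j false := by
  unfold pvSet2
  rw [getD_set_list]
  by_cases hA : r.toNat = i ∧ r.toNat < xs.length
  · rw [if_pos hA, getD_set_list, hA.1]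
    by_cases hj : c.toNat = j
    · have hB : c.toNat = j ∧ c.toNat < (xs.getD i []).length := ⟨hj, by rw [← hA.1]; omega⟩
      rw [if_pos hB, if_pos (And.intro rfl hj)]
    · rw [if_neg (fun h => hj h.1), if_neg (fun h => hj h.2)]
  · have hi : r.toNat ≠ i := fun h => hA ⟨h, by omega⟩
    rw [if_neg hA, if_neg (fun h => hi h.1)]

-- Part 2: generic fold machinery -------------------------------------------------------

theorem foldl_pyRange_inv {σ : Type} (a b : Int) (hab : a ≤ b) (f : σ → Int → σ)
    (Inv : Int → σ → Prop) (init : σ) (h0 : Inv a init)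
    (hstep : ∀ k s, a ≤ k → k < b → Inv k s → Inv (k + 1) (f s k)) :
    Inv b ((PySem.List.pyRange a b 1).foldl f init) := by
  have key : ∀ m : Nat, ∀ b : Int, b - a = m → a ≤ b →
      (∀ k s, a ≤ k → k < b → Inv k s → Inv (k + 1) (f s k)) →
      Inv b ((PySem.List.pyRange a b 1).foldl f init) := by
    intro m
    induction m with
    | zero =>
      intro b hm hab _
      have hba : b = a := by omega
      subst hba
      rw [PySem.List.pyRange_one_eq_nil le_rfl]
      exact h0
    | succ m ih =>
      intro b hm hab hstep
      have hb' : b = (b - 1) + 1 := by omega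
      have h1 : a ≤ b - 1 := by omega
      rw [hb', PySem.List.pyRange_one_succ_right h1, List.foldl_append]
      simp only [List.foldl_cons, List.foldl_nil]
      exact hstep (b - 1) _ h1 (by omega)
        (ih (b - 1) (by omega) h1 (fun k s hk hk2 => hstep k s hk (by omega)))
  exact key (b - a).toNat b (by omega) hab hstep

theorem foldl_append_rows {α β : Type} (L : List α) (f : α → β) (acc : List β) :
    L.foldl (fun acc r => acc ++ [f r]) acc = acc ++ L.map f := by
  induction L generalizing acc with
  | nil => simp
  | cons x t ih => simp [ih]

-- Part 3: the connectivity relation ----------------------------------------------------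

-- strict row-major order on cells, as a Bool (scan order of both programs)
def kltb (x y : Int × Int) : Bool :=
  x.1 < y.1 || (x.1 == y.1 && x.2 < y.2)

theorem kltb_iff (x y : Int × Int) :
    kltb x y = true ↔ (x.1 < y.1 ∨ (x.1 = y.1 ∧ x.2 < y.2)) := by
  simp [kltb]

-- x is a rect_color cell of the grid
def Rct (g : List (List Int)) (rect : Int) (x : Int × Int) : Prop :=
  0 ≤ x.1 ∧ x.1 < (g.length : Int) ∧ 0 ≤ x.2 ∧ x.2 < ((g.headD []).length : Int) ∧
    pvAt g x.1 x.2 = rect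

-- 4-adjacency between rect cells
def Adjc (g : List (List Int)) (rect : Int) (x y : Int × Int) : Prop :=
  Rct g rect x ∧ Rct g rect y ∧
    ((x.1 = y.1 ∧ (x.2 = y.2 + 1 ∨ y.2 = x.2 + 1)) ∨
     (x.2 = y.2 ∧ (x.1 = y.1 + 1 ∨ y.1 = x.1 + 1)))

-- adjacency within a region P, and its reflexive-transitive closure
def AdjP (g : List (List Int)) (rect : Int) (P : Int × Int → Prop) (x y : Int × Int) : Prop :=
  Adjc g rect x y ∧ P x ∧ P y

def ConnP (g : List (List Int)) (rect : Int) (P : Int × Int → Prop) : Int × Int → Int × Int → Prop :=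
  Relation.ReflTransGen (AdjP g rect P)

def Conn (g : List (List Int)) (rect : Int) : Int × Int → Int × Int → Prop :=
  Relation.ReflTransGen (Adjc g rect)

theorem adjc_symm (g : List (List Int)) (rect : Int) {x y : Int × Int}
    (h : Adjc g rect x y) : Adjc g rect y x := by
  obtain ⟨hx, hy, hd⟩ := h
  exact ⟨hy, hx, by tauto⟩

theorem adjP_symm (g : List (List Int)) (rect : Int) (P : Int × Int → Prop) {x y : Int × Int}
    (h : AdjP g rect P x y) : AdjP g rect P y x :=
  ⟨adjc_symm g rect h.1, h.2.2, h.2.1⟩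

theorem connP_symm (g : List (List Int)) (rect : Int) (P : Int × Int → Prop) {x y : Int × Int}
    (h : ConnP g rect P x y) : ConnP g rect P y x :=
  Relation.ReflTransGen.symmetric (fun _ _ hh => adjP_symm g rect P hh) h

theorem conn_symm (g : List (List Int)) (rect : Int) {x y : Int × Int}
    (h : Conn g rect x y) : Conn g rect y x :=
  Relation.ReflTransGen.symmetric (fun _ _ hh => adjc_symm g rect hh) h

theorem connP_trans (g : List (List Int)) (rect : Int) (P : Int × Int → Prop) {x y z : Int × Int}
    (h1 : ConnP g rect P x y) (h2 : ConnP g rect P y z) : ConnP g rect P x z :=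
  Relation.ReflTransGen.trans h1 h2

theorem connP_toConn (g : List (List Int)) (rect : Int) (P : Int × Int → Prop) {x y : Int × Int}
    (h : ConnP g rect P x y) : Conn g rect x y :=
  Relation.ReflTransGen.mono (fun _ _ hh => hh.1) h

theorem conn_toConnP (g : List (List Int)) (rect : Int) {P : Int × Int → Prop}
    (hP : ∀ z, Rct g rect z → P z) {x y : Int × Int} (h : Conn g rect x y) :
    ConnP g rect P x y :=
  Relation.ReflTransGen.mono (fun _ _ hh => ⟨hh, hP _ hh.1, hP _ hh.2.1⟩) h

def ufM (par : PySem.Dict (Int × Int) (Int × Int)) (x : Int × Int) : Nat :=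
  (par.items.filter (fun p => kltb x p.1)).length

-- parent pointers go strictly forward in scan order, stay in the dict,
-- and connect only cells of the same region-restricted component
def GoodPar (g : List (List Int)) (rect : Int) (P : Int × Int → Prop)
    (par : PySem.Dict (Int × Int) (Int × Int)) : Prop :=
  ∀ k v, par.get? k = some v →
    k = v ∨ (kltb k v = true ∧ par.contains v = true ∧ ConnP g rect P k v)

theorem goodPar_mono (g : List (List Int)) (rect : Int) {P Q : Int × Int → Prop}
    (h : ∀ z, Rct g rect z → (P z → Q z)) {par} (hg : GoodPar g rect P par) :
    GoodPar g rect Q par := by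
  intro k v hkv
  rcases hg k v hkv with rfl | ⟨h1, h2, h3⟩
  · exact Or.inl rfl
  · refine Or.inr ⟨h1, h2, ?_⟩
    exact Relation.ReflTransGen.mono
      (fun a b hh => ⟨hh.1, h a hh.1.1 hh.2.1, h b hh.1.2.1 hh.2.2⟩) h3

theorem kltb_trans {x y z : Int × Int} (h1 : kltb x y = true) (h2 : kltb y z = true) :
    kltb x z = true := by
  rw [kltb_iff] at *; omega

theorem kltb_irrefl (x : Int × Int) : kltb x x = false := by
  by_cases h : kltb x x = true
  · rw [kltb_iff] at h; omega
  · simpa using h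

theorem ufM_le (par : PySem.Dict (Int × Int) (Int × Int)) (x : Int × Int) :
    ufM par x ≤ par.items.length := List.length_filter_le _ _

theorem ufM_lt (par : PySem.Dict (Int × Int) (Int × Int)) {x p : Int × Int}
    (hklt : kltb x p = true) (hp : par.contains p = true) :
    ufM par p < ufM par x := by
  unfold ufM
  have hsub : (par.items.filter (fun q => kltb p q.1)).Sublist
      (par.items.filter (fun q => kltb x q.1)) := by
    apply List.monotone_filter_right
    intro q hq
    exact kltb_trans hklt hq
  have hlen := hsub.length_le
  rcases Nat.lt_or_ge (par.items.filter (fun q => kltb p q.1)).length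
      (par.items.filter (fun q => kltb x q.1)).length with h | h
  · exact h
  · exfalso
    have heq : par.items.filter (fun q => kltb p q.1) =
        par.items.filter (fun q => kltb x q.1) := hsub.eq_of_length (by omega)
    -- p is a key of par, passes the x-filter but not the p-filter
    have hmem : ∃ v, (p, v) ∈ par.items := by
      rw [PySem.Dict.contains_iff_mem_keys] at hp
      simp only [PySem.Dict.keys, List.mem_map] at hp
      obtain ⟨q, hq, hq2⟩ := hp
      exact ⟨q.2, by rwa [show (p, q.2) = q from by cases q; simp_all]⟩
    obtain ⟨v, hv⟩ := hmem
    have h1 : (p, v) ∈ par.items.filter (fun q => kltb x q.1) :=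
      List.mem_filter.mpr ⟨hv, hklt⟩
    rw [← heq] at h1
    have := (List.mem_filter.mp h1).2
    simp [kltb_irrefl] at this

theorem pvFindF_stop (par : PySem.Dict (Int × Int) (Int × Int)) {x : Int × Int}
    (h : par.getD x x = x) : ∀ f, pvFindF par f x = x := by
  intro f
  cases f with
  | zero => rfl
  | succ f => simp [pvFindF, h]

theorem pvFindF_step (par : PySem.Dict (Int × Int) (Int × Int)) {x p : Int × Int}
    (h : par.getD x x = p) (hne : p ≠ x) (f : Nat) :
    pvFindF par (f + 1) x = pvFindF par f p := by
  simp [pvFindF, h, hne]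

-- parent pointer of a contained, non-root key
theorem goodPar_chain (g : List (List Int)) (rect : Int) (P : Int × Int → Prop)
    {par} (hg : GoodPar g rect P par) {x p : Int × Int}
    (hget : par.get? x = some p) (hne : p ≠ x) :
    kltb x p = true ∧ par.contains p = true ∧ ConnP g rect P x p := by
  rcases hg x p hget with rfl | h
  · exact absurd rfl hne
  · exact h

-- fuel insensitivity of find, given GoodPar
theorem pvFindF_canon (g : List (List Int)) (rect : Int) (P : Int × Int → Prop)
    {par} (hg : GoodPar g rect P par) :
    ∀ m : Nat, ∀ x f, ufM par x = m → m < f →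
      pvFindF par f x = pvFindF par (m + 1) x := by
  intro m
  induction m using Nat.strong_induction_on with
  | _ m ih =>
    intro x f hm hf
    rcases hget : par.get? x with _ | p
    · have hstop : par.getD x x = x := by
        rw [PySem.Dict.getD_eq_get?_getD, hget]; rfl
      rw [pvFindF_stop par hstop, pvFindF_stop par hstop]
    · have hgetD : par.getD x x = p := by
        rw [PySem.Dict.getD_eq_get?_getD, hget]; rfl
      by_cases hpx : p = x
      · subst hpx
        rw [pvFindF_stop par hgetD, pvFindF_stop par hgetD]
      · obtain ⟨h1, h2, _⟩ := goodPar_chain g rect P hg hget hpx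
        have hmp : ufM par p < m := hm ▸ ufM_lt par h1 h2
        obtain ⟨f', rfl⟩ : ∃ f', f = f' + 1 := ⟨f - 1, by omega⟩
        rw [pvFindF_step par hgetD hpx, pvFindF_step par hgetD hpx]
        rw [ih (ufM par p) hmp p f' rfl (by omega),
            ih (ufM par p) hmp p m rfl (by omega)]

theorem pvFind_eq_fuel (g : List (List Int)) (rect : Int) (P : Int × Int → Prop)
    {par} (hg : GoodPar g rect P par) (x : Int × Int) {f : Nat}
    (hf : ufM par x < f) : pvFindF par f x = pvFind par x := by
  unfold pvFind
  rw [pvFindF_canon g rect P hg (ufM par x) x f rfl hf,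
      pvFindF_canon g rect P hg (ufM par x) x (par.items.length + 1) rfl
        (by have := ufM_le par x; omega)]

theorem pvFind_stop (par : PySem.Dict (Int × Int) (Int × Int)) {x : Int × Int}
    (h : par.getD x x = x) : pvFind par x = x := pvFindF_stop par h _

theorem pvFind_step (g : List (List Int)) (rect : Int) (P : Int × Int → Prop)
    {par} (hg : GoodPar g rect P par) {x p : Int × Int}
    (hget : par.get? x = some p) : pvFind par x = pvFind par p := by
  have hgetD : par.getD x x = p := by rw [PySem.Dict.getD_eq_get?_getD, hget]; rfl
  by_cases hpx : p = x
  · subst hpx; rfl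
  · obtain ⟨h1, h2, _⟩ := goodPar_chain g rect P hg hget hpx
    have hmp : ufM par p < ufM par x := ufM_lt par h1 h2
    calc pvFind par x = pvFindF par (ufM par x + 1) x := by
          rw [pvFind_eq_fuel g rect P hg x (by omega)]
      _ = pvFindF par (ufM par x) p := pvFindF_step par hgetD hpx _
      _ = pvFind par p := pvFind_eq_fuel g rect P hg p (by omega)

-- the root of a contained key: contained, a fixpoint, in the same component
theorem pvFind_spec (g : List (List Int)) (rect : Int) (P : Int × Int → Prop)
    {par} (hg : GoodPar g rect P par) :
    ∀ m, ∀ x, ufM par x = m → par.contains x = true →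
      par.contains (pvFind par x) = true ∧
      par.get? (pvFind par x) = some (pvFind par x) ∧
      ConnP g rect P x (pvFind par x) := by
  intro m
  induction m using Nat.strong_induction_on with
  | _ m ih =>
    intro x hm hx
    rcases hget : par.get? x with _ | p
    · exfalso
      rw [PySem.Dict.contains_eq_isSome_get?, hget] at hx
      simp at hx
    · by_cases hpx : p = x
      · subst hpx
        have hstop : par.getD p p = p := by
          rw [PySem.Dict.getD_eq_get?_getD, hget]; rfl
        rw [pvFind_stop par hstop]
        exact ⟨hx, hget, Relation.ReflTransGen.refl⟩
      · obtain ⟨h1, h2, h3⟩ := goodPar_chain g rect P hg hget hpx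
        have hmp : ufM par p < m := hm ▸ ufM_lt par h1 h2
        have := ih (ufM par p) hmp p rfl h2
        rw [pvFind_step g rect P hg hget]
        exact ⟨this.1, this.2.1, connP_trans g rect P h3 this.2.2⟩

theorem contains_of_get?_some (par : PySem.Dict (Int × Int) (Int × Int)) {x v : Int × Int}
    (h : par.get? x = some v) : par.contains x = true := by
  rw [PySem.Dict.contains_eq_isSome_get?, h]; rfl

-- inserting a fresh self-loop does not change the roots of old keys
theorem pvFind_insert_fresh (g : List (List Int)) (rect : Int) (P : Int × Int → Prop)
    {par} (hg : GoodPar g rect P par) {c : Int × Int} (hc : par.contains c = false) :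
    ∀ x, par.contains x = true → pvFind (par.insert c c) x = pvFind par x := by
  have hfuel : ∀ f x, par.contains x = true →
      pvFindF (par.insert c c) f x = pvFindF par f x := by
    intro f
    induction f with
    | zero => intro x _; rfl
    | succ f ih =>
      intro x hx
      have hxc : x ≠ c := fun h => by rw [h, hc] at hx; cases hx
      rcases hget : par.get? x with _ | p
      · rw [PySem.Dict.contains_eq_isSome_get?, hget] at hx; cases hx
      · have hget' : (par.insert c c).get? x = some p := by
          rw [PySem.Dict.get?_insert, if_neg hxc, hget]
        have hD : par.getD x x = p := by rw [PySem.Dict.getD_eq_get?_getD, hget]; rfl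
        have hD' : (par.insert c c).getD x x = p := by
          rw [PySem.Dict.getD_eq_get?_getD, hget']; rfl
        by_cases hpx : p = x
        · subst hpx
          rw [pvFindF_stop _ hD, pvFindF_stop _ hD']
        · rw [pvFindF_step _ hD hpx, pvFindF_step _ hD' hpx]
          exact ih p (goodPar_chain g rect P hg hget hpx).2.1
  intro x hx
  have hg' : GoodPar g rect P (par.insert c c) := by
    intro k v hkv
    rw [PySem.Dict.get?_insert] at hkv
    by_cases hkc : k = c
    · rw [if_pos hkc] at hkv
      exact Or.inl (by cases hkv; exact hkc)
    · rw [if_neg hkc] at hkv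
      rcases hg k v hkv with rfl | ⟨h1, h2, h3⟩
      · exact Or.inl rfl
      · refine Or.inr ⟨h1, ?_, h3⟩
        rw [PySem.Dict.contains_insert, h2]
        simp
  have hle : ufM par x ≤ ufM (par.insert c c) x := by
    unfold ufM
    rw [PySem.Dict.items_insert_of_not_contains par c hc, List.filter_append,
      List.length_append]
    omega
  calc pvFind (par.insert c c) x
      = pvFindF (par.insert c c) (ufM (par.insert c c) x + 1) x :=
        (pvFind_eq_fuel g rect P hg' x (by omega)).symm
    _ = pvFindF par (ufM (par.insert c c) x + 1) x := hfuel _ x hx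
    _ = pvFind par x := pvFind_eq_fuel g rect P hg x (by omega)

theorem pvFind_union (g : List (List Int)) (rect : Int) (P : Int × Int → Prop)
    {par} (hg : GoodPar g rect P par) {ra rb : Int × Int}
    (hra : par.get? ra = some ra) (hrb : par.get? rb = some rb) (hne : ra ≠ rb)
    (hklt : kltb ra rb = true) (hconn : ConnP g rect P ra rb) :
    GoodPar g rect P (par.insert ra rb) ∧
    (∀ x, par.contains x = true →
      pvFind (par.insert ra rb) x = if pvFind par x = ra then rb else pvFind par x) := by
  have hg' : GoodPar g rect P (par.insert ra rb) := by
    intro k v hkv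
    rw [PySem.Dict.get?_insert] at hkv
    by_cases hka : k = ra
    · subst hka
      rw [if_pos rfl] at hkv
      cases hkv
      refine Or.inr ⟨hklt, ?_, hconn⟩
      rw [PySem.Dict.contains_insert]
      simp [contains_of_get?_some par hrb]
    · rw [if_neg hka] at hkv
      rcases hg k v hkv with rfl | ⟨h1, h2, h3⟩
      · exact Or.inl rfl
      · refine Or.inr ⟨h1, ?_, h3⟩
        rw [PySem.Dict.contains_insert, h2]
        simp
  refine ⟨hg', ?_⟩
  have main : ∀ m, ∀ x, ufM par x = m → par.contains x = true →
      pvFind (par.insert ra rb) x = if pvFind par x = ra then rb else pvFind par x := by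
    intro m
    induction m using Nat.strong_induction_on with
    | _ m ih =>
      intro x hm hx
      rcases hget : par.get? x with _ | p
      · rw [PySem.Dict.contains_eq_isSome_get?, hget] at hx; cases hx
      · by_cases hpx : p = x
        · subst hpx
          -- p is a root of par
          have hrootx : pvFind par p = p := pvFind_stop par
            (by rw [PySem.Dict.getD_eq_get?_getD, hget]; rfl)
          by_cases hxa : p = ra
          · subst hxa
            rw [hrootx, if_pos rfl]
            have h1 : (par.insert p rb).get? p = some rb := by
              rw [PySem.Dict.get?_insert, if_pos rfl]
            have h2 : (par.insert p rb).get? rb = some rb := by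
              rw [PySem.Dict.get?_insert, if_neg (Ne.symm hne), hrb]
            rw [pvFind_step g rect P hg' h1]
            exact pvFind_stop _ (by rw [PySem.Dict.getD_eq_get?_getD, h2]; rfl)
          · rw [hrootx, if_neg hxa]
            have h1 : (par.insert ra rb).get? p = some p := by
              rw [PySem.Dict.get?_insert, if_neg hxa, hget]
            exact pvFind_stop _ (by rw [PySem.Dict.getD_eq_get?_getD, h1]; rfl)
        · obtain ⟨h1, h2, _⟩ := goodPar_chain g rect P hg hget hpx
          have hxa : x ≠ ra := by
            intro hh
            subst hh
            rw [hget] at hra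
            exact hpx (by cases hra; rfl)
          have hget' : (par.insert ra rb).get? x = some p := by
            rw [PySem.Dict.get?_insert, if_neg hxa, hget]
          rw [pvFind_step g rect P hg' hget', pvFind_step g rect P hg hget]
          exact ih (ufM par p) (hm ▸ ufM_lt par h1 h2) p rfl h2
  exact fun x hx => main (ufM par x) x rfl hx

-- the body of pvUnions' inner loop, let-free (definitionally equal to the port's body)
def ufStepU (g : List (List Int)) (rect r c : Int)
    (par1 : PySem.Dict (Int × Int) (Int × Int)) : PySem.Dict (Int × Int) (Int × Int) :=
  if 0 < r ∧ pvAt g (r - 1) c = rect then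
    if pvFind par1 (r - 1, c) ≠ pvFind par1 (r, c) then
      par1.insert (pvFind par1 (r - 1, c)) (pvFind par1 (r, c))
    else par1
  else par1

def ufStepL (g : List (List Int)) (rect r c : Int)
    (par2 : PySem.Dict (Int × Int) (Int × Int)) : PySem.Dict (Int × Int) (Int × Int) :=
  if 0 < c ∧ pvAt g r (c - 1) = rect then
    if pvFind par2 (r, c - 1) ≠ pvFind par2 (r, c) then
      par2.insert (pvFind par2 (r, c - 1)) (pvFind par2 (r, c))
    else par2
  else par2

def ufStep (g : List (List Int)) (rect r : Int)
    (par : PySem.Dict (Int × Int) (Int × Int)) (c : Int) :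
    PySem.Dict (Int × Int) (Int × Int) :=
  if pvAt g r c ≠ rect then par
  else ufStepL g rect r c (ufStepU g rect r c (par.insert (r, c) (r, c)))

theorem pvUnions_eq (g : List (List Int)) (rows cols rect : Int) :
    pvUnions g rows cols rect =
      (PySem.List.pyRange 0 rows 1).foldl (fun par r =>
        (PySem.List.pyRange 0 cols 1).foldl (ufStep g rect r) par) PySem.Dict.empty := rfl

-- the scan invariant
structure UFS (g : List (List Int)) (rect : Int) (bnd : Int × Int)
    (par : PySem.Dict (Int × Int) (Int × Int)) : Prop where
  dom : ∀ x, par.contains x = true ↔ (Rct g rect x ∧ kltb x bnd = true)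
  good : GoodPar g rect (fun z => kltb z bnd = true) par
  edges : ∀ a b, Adjc g rect a b → kltb a bnd = true → kltb b bnd = true →
    pvFind par a = pvFind par b

theorem ufs_congr {g : List (List Int)} {rect : Int} {b1 b2 : Int × Int} {par}
    (hb : ∀ x, Rct g rect x → (kltb x b1 = true ↔ kltb x b2 = true))
    (h : UFS g rect b1 par) : UFS g rect b2 par := by
  refine ⟨?_, ?_, ?_⟩
  · intro x
    rw [h.dom x]
    constructor
    · rintro ⟨h1, h2⟩; exact ⟨h1, (hb x h1).mp h2⟩
    · rintro ⟨h1, h2⟩; exact ⟨h1, (hb x h1).mpr h2⟩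
  · exact goodPar_mono g rect (fun z hz => (hb z hz).mp) h.good
  · intro a b hadj h1 h2
    exact h.edges a b hadj ((hb a hadj.1).mpr h1) ((hb b hadj.2.1).mpr h2)

-- one union with an already-scanned neighbour nbr of the current cell cur
theorem uf_union_one (g : List (List Int)) (rect : Int) (P : Int × Int → Prop)
    {d : PySem.Dict (Int × Int) (Int × Int)} {cur nbr : Int × Int}
    (hg : GoodPar g rect P d)
    (hdom : ∀ x, d.contains x = true → x = cur ∨ kltb x cur = true)
    (hcur : d.get? cur = some cur) (hnbr : d.contains nbr = true)
    (hconn : ConnP g rect P nbr cur) :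
    GoodPar g rect P
        (if pvFind d nbr ≠ pvFind d cur then d.insert (pvFind d nbr) (pvFind d cur) else d) ∧
      (∀ x, (if pvFind d nbr ≠ pvFind d cur then d.insert (pvFind d nbr) (pvFind d cur) else d).contains x
          = d.contains x) ∧
      (if pvFind d nbr ≠ pvFind d cur then d.insert (pvFind d nbr) (pvFind d cur) else d).get? cur
          = some cur ∧
      pvFind (if pvFind d nbr ≠ pvFind d cur then d.insert (pvFind d nbr) (pvFind d cur) else d) nbr
        = pvFind (if pvFind d nbr ≠ pvFind d cur then d.insert (pvFind d nbr) (pvFind d cur) else d) cur ∧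
      (∀ x y, d.contains x = true → d.contains y = true → pvFind d x = pvFind d y →
        pvFind (if pvFind d nbr ≠ pvFind d cur then d.insert (pvFind d nbr) (pvFind d cur) else d) x
          = pvFind (if pvFind d nbr ≠ pvFind d cur then d.insert (pvFind d nbr) (pvFind d cur) else d) y) := by
  have hrbcur : pvFind d cur = cur := pvFind_stop d
    (by rw [PySem.Dict.getD_eq_get?_getD, hcur]; rfl)
  by_cases hne : pvFind d nbr ≠ pvFind d cur
  · have hra_spec := pvFind_spec g rect P hg (ufM d nbr) nbr rfl hnbr
    have hraC : d.contains (pvFind d nbr) = true := hra_spec.1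
    have hraR : d.get? (pvFind d nbr) = some (pvFind d nbr) := hra_spec.2.1
    have hraNe : pvFind d nbr ≠ cur := by rw [← hrbcur]; exact hne
    have hklt : kltb (pvFind d nbr) (pvFind d cur) = true := by
      rw [hrbcur]
      rcases hdom _ hraC with h | h
      · exact absurd h hraNe
      · exact h
    have hconn2 : ConnP g rect P (pvFind d nbr) (pvFind d cur) := by
      rw [hrbcur]
      exact connP_trans g rect P (connP_symm g rect P hra_spec.2.2) hconn
    obtain ⟨hg', hchar⟩ := pvFind_union g rect P hg hraR
      (show d.get? (pvFind d cur) = some (pvFind d cur) by rw [hrbcur]; exact hcur)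
      hne hklt hconn2
    rw [if_pos hne]
    refine ⟨hg', ?_, ?_, ?_, ?_⟩
    · intro x
      rw [PySem.Dict.contains_insert]
      rcases hbx : d.contains x with _ | _
      · simp only [Bool.or_false]
        by_cases hxe : x = pvFind d nbr
        · subst hxe; rw [hraC] at hbx; cases hbx
        · simp [hxe]
      · simp
    · rw [PySem.Dict.get?_insert, if_neg (Ne.symm hraNe), hcur]
    · rw [hchar nbr hnbr, hchar cur (contains_of_get?_some d hcur),
        if_pos rfl, if_neg (fun hh => hraNe (by rw [← hh, hrbcur]))]
    · intro x y hx hy hxy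
      rw [hchar x hx, hchar y hy, hxy]
  · rw [if_neg hne]
    push Not at hne
    exact ⟨hg, fun _ => rfl, hcur, hne, fun x y _ _ h => h⟩

theorem kltb_succ (x : Int × Int) (r c : Int) :
    kltb x (r, c + 1) = true ↔ (kltb x (r, c) = true ∨ x = (r, c)) := by
  rw [kltb_iff, kltb_iff, Prod.ext_iff]
  omega

theorem adj_cur_cases {g : List (List Int)} {rect : Int} {r c : Int} {a : Int × Int}
    (hadj : Adjc g rect a (r, c)) (hreg : kltb a (r, c) = true) :
    a = (r - 1, c) ∨ a = (r, c - 1) := by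
  obtain ⟨_, _, hd⟩ := hadj
  rw [kltb_iff] at hreg
  rw [Prod.ext_iff, Prod.ext_iff]
  simp only at hd hreg ⊢
  omega

theorem goodPar_insert_self (g : List (List Int)) (rect : Int) (P : Int × Int → Prop)
    {par} (hg : GoodPar g rect P par) (c : Int × Int) :
    GoodPar g rect P (par.insert c c) := by
  intro k v hkv
  rw [PySem.Dict.get?_insert] at hkv
  by_cases hkc : k = c
  · rw [if_pos hkc] at hkv
    exact Or.inl (by cases hkv; exact hkc)
  · rw [if_neg hkc] at hkv
    rcases hg k v hkv with rfl | ⟨h1, h2, h3⟩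
    · exact Or.inl rfl
    · refine Or.inr ⟨h1, ?_, h3⟩
      rw [PySem.Dict.contains_insert, h2]
      simp

theorem uf_step (g : List (List Int)) (rect : Int) (r c : Int)
    (hr : 0 ≤ r) (hrr : r < (g.length : Int)) (hc : 0 ≤ c)
    (hcc : c < ((g.headD []).length : Int)) {par}
    (h : UFS g rect (r, c) par) :
    UFS g rect (r, c + 1) (ufStep g rect r par c) := by
  unfold ufStep
  by_cases hrect : pvAt g r c = rect
  · rw [if_neg (by simpa using hrect)]
    have hRct : Rct g rect (r, c) := ⟨hr, hrr, hc, hcc, hrect⟩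
    have hnotin : par.contains (r, c) = false := by
      rcases hcon : par.contains (r, c) with _ | _
      · rfl
      · have := ((h.dom (r, c)).mp hcon).2
        rw [kltb_irrefl] at this
        cases this
    have hmono : ∀ z : Int × Int, kltb z (r, c) = true → kltb z (r, c + 1) = true :=
      fun z hz => (kltb_succ z r c).mpr (Or.inl hz)
    have good0 : GoodPar g rect (fun z => kltb z (r, c + 1) = true) par :=
      goodPar_mono g rect (fun z _ => hmono z) h.good
    have good1 : GoodPar g rect (fun z => kltb z (r, c + 1) = true) (par.insert (r, c) (r, c)) :=
      goodPar_insert_self g rect _ good0 (r, c)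
    have dom1 : ∀ x, (par.insert (r, c) (r, c)).contains x = true ↔
        (Rct g rect x ∧ kltb x (r, c + 1) = true) := by
      intro x
      rw [PySem.Dict.contains_insert]
      by_cases hx : x = (r, c)
      · subst hx
        simp [hRct, (kltb_succ _ r c).mpr (Or.inr rfl)]
      · have : (x == (r, c)) = false := by simpa using hx
        rw [this, Bool.false_or, h.dom x, kltb_succ]
        constructor
        · rintro ⟨h1, h2⟩; exact ⟨h1, Or.inl h2⟩
        · rintro ⟨h1, h2 | h2⟩
          · exact ⟨h1, h2⟩
          · exact absurd h2 hx
    have hdomKlt1 : ∀ x, (par.insert (r, c) (r, c)).contains x = true →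
        x = (r, c) ∨ kltb x (r, c) = true := by
      intro x hx
      rcases (kltb_succ x r c).mp ((dom1 x).mp hx).2 with h2 | h2
      · exact Or.inr h2
      · exact Or.inl h2
    have hget1cur : (par.insert (r, c) (r, c)).get? (r, c) = some (r, c) := by
      rw [PySem.Dict.get?_insert, if_pos rfl]
    have root1_old : ∀ x, par.contains x = true →
        pvFind (par.insert (r, c) (r, c)) x = pvFind par x :=
      pvFind_insert_fresh g rect _ h.good hnotin
    have regcur : kltb (r, c) (r, c + 1) = true := (kltb_succ _ r c).mpr (Or.inr rfl)
    -- up union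
    set par1 := par.insert (r, c) (r, c) with hpar1
    have hstepU : GoodPar g rect (fun z => kltb z (r, c + 1) = true) (ufStepU g rect r c par1) ∧
        (∀ x, (ufStepU g rect r c par1).contains x = par1.contains x) ∧
        (ufStepU g rect r c par1).get? (r, c) = some (r, c) ∧
        ((0 < r ∧ pvAt g (r - 1) c = rect) →
          pvFind (ufStepU g rect r c par1) (r - 1, c) = pvFind (ufStepU g rect r c par1) (r, c)) ∧
        (∀ x y, par1.contains x = true → par1.contains y = true →
          pvFind par1 x = pvFind par1 y →
          pvFind (ufStepU g rect r c par1) x = pvFind (ufStepU g rect r c par1) y) := by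
      unfold ufStepU
      by_cases hup : 0 < r ∧ pvAt g (r - 1) c = rect
      · rw [if_pos hup]
        have hRup : Rct g rect (r - 1, c) := ⟨by omega, by omega, hc, hcc, hup.2⟩
        have hregup : kltb (r - 1, c) (r, c + 1) = true := by rw [kltb_iff]; simp
        have hconn : ConnP g rect (fun z => kltb z (r, c + 1) = true) (r - 1, c) (r, c) :=
          Relation.ReflTransGen.single
            ⟨⟨hRup, hRct, Or.inr ⟨rfl, Or.inr (by omega)⟩⟩, hregup, regcur⟩
        have hnbrC : par1.contains (r - 1, c) = true := (dom1 _).mpr ⟨hRup, hregup⟩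
        obtain ⟨g1, c1, q1, e1, p1⟩ := uf_union_one g rect _ good1 hdomKlt1 hget1cur hnbrC hconn
        exact ⟨g1, c1, q1, fun _ => e1, p1⟩
      · rw [if_neg hup]
        exact ⟨good1, fun _ => rfl, hget1cur, fun hh => absurd hh hup,
          fun x y _ _ hh => hh⟩
    obtain ⟨good2, cont2, get2, up2, pres2⟩ := hstepU
    set par2 := ufStepU g rect r c par1 with hpar2
    have hdomKlt2 : ∀ x, par2.contains x = true → x = (r, c) ∨ kltb x (r, c) = true := by
      intro x hx
      exact hdomKlt1 x (by rw [← cont2 x]; exact hx)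
    have hstepL : GoodPar g rect (fun z => kltb z (r, c + 1) = true) (ufStepL g rect r c par2) ∧
        (∀ x, (ufStepL g rect r c par2).contains x = par2.contains x) ∧
        ((0 < c ∧ pvAt g r (c - 1) = rect) →
          pvFind (ufStepL g rect r c par2) (r, c - 1) = pvFind (ufStepL g rect r c par2) (r, c)) ∧
        (∀ x y, par2.contains x = true → par2.contains y = true →
          pvFind par2 x = pvFind par2 y →
          pvFind (ufStepL g rect r c par2) x = pvFind (ufStepL g rect r c par2) y) := by
      unfold ufStepL
      by_cases hlf : 0 < c ∧ pvAt g r (c - 1) = rect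
      · rw [if_pos hlf]
        have hRlf : Rct g rect (r, c - 1) := ⟨hr, hrr, by omega, by omega, hlf.2⟩
        have hreglf : kltb (r, c - 1) (r, c + 1) = true := by rw [kltb_iff]; simp
        have hconn : ConnP g rect (fun z => kltb z (r, c + 1) = true) (r, c - 1) (r, c) :=
          Relation.ReflTransGen.single
            ⟨⟨hRlf, hRct, Or.inl ⟨rfl, Or.inr (by omega)⟩⟩, hreglf, regcur⟩
        have hnbrC : par2.contains (r, c - 1) = true := by
          rw [cont2]
          exact (dom1 _).mpr ⟨hRlf, hreglf⟩
        obtain ⟨g1, c1, _, e1, p1⟩ := uf_union_one g rect _ good2 hdomKlt2 get2 hnbrC hconn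
        exact ⟨g1, c1, fun _ => e1, p1⟩
      · rw [if_neg hlf]
        exact ⟨good2, fun _ => rfl, fun hh => absurd hh hlf, fun x y _ _ hh => hh⟩
    obtain ⟨good3, cont3, lf3, pres3⟩ := hstepL
    refine ⟨?_, good3, ?_⟩
    · intro x
      rw [cont3, cont2]
      exact dom1 x
    · intro a b hadj rega regb
      have hcont1 : ∀ z, Rct g rect z → kltb z (r, c + 1) = true → par1.contains z = true :=
        fun z h1 h2 => (dom1 z).mpr ⟨h1, h2⟩
      have hcont2 : ∀ z, Rct g rect z → kltb z (r, c + 1) = true → par2.contains z = true :=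
        fun z h1 h2 => by rw [cont2]; exact hcont1 z h1 h2
      by_cases hacur : a = (r, c) <;> by_cases hbcur : b = (r, c)
      · subst hacur hbcur
        obtain ⟨_, _, hd⟩ := hadj
        simp only at hd
        omega
      · -- a = cur, b ≠ cur : symmetric to the case below
        subst hacur
        have hbk : kltb b (r, c) = true := by
          rcases (kltb_succ b r c).mp regb with h2 | h2
          · exact h2
          · exact absurd h2 hbcur
        rcases adj_cur_cases (adjc_symm g rect hadj) hbk with rfl | rfl
        · have hcond : 0 < r ∧ pvAt g (r - 1) c = rect := by
            obtain ⟨_, hRb, _⟩ := hadj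
            exact ⟨by have := hRb.1; simp at this; omega, hRb.2.2.2.2⟩
          exact (pres3 _ _ (hcont2 _ hadj.2.1 regb) (hcont2 _ hRct regcur) (up2 hcond)).symm
        · have hcond : 0 < c ∧ pvAt g r (c - 1) = rect := by
            obtain ⟨_, hRb, _⟩ := hadj
            exact ⟨by have := hRb.2.2.1; simp at this; omega, hRb.2.2.2.2⟩
          exact (lf3 hcond).symm
      · subst hbcur
        have hak : kltb a (r, c) = true := by
          rcases (kltb_succ a r c).mp rega with h2 | h2
          · exact h2
          · exact absurd h2 hacur
        rcases adj_cur_cases hadj hak with rfl | rfl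
        · have hcond : 0 < r ∧ pvAt g (r - 1) c = rect := by
            obtain ⟨hRa, _, _⟩ := hadj
            exact ⟨by have := hRa.1; simp at this; omega, hRa.2.2.2.2⟩
          exact pres3 _ _ (hcont2 _ hadj.1 rega) (hcont2 _ hRct regcur) (up2 hcond)
        · have hcond : 0 < c ∧ pvAt g r (c - 1) = rect := by
            obtain ⟨hRa, _, _⟩ := hadj
            exact ⟨by have := hRa.2.2.1; simp at this; omega, hRa.2.2.2.2⟩
          exact lf3 hcond
      · -- both old
        have hak : kltb a (r, c) = true := by
          rcases (kltb_succ a r c).mp rega with h2 | h2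
          · exact h2
          · exact absurd h2 hacur
        have hbk : kltb b (r, c) = true := by
          rcases (kltb_succ b r c).mp regb with h2 | h2
          · exact h2
          · exact absurd h2 hbcur
        have h0 : pvFind par a = pvFind par b := h.edges a b hadj hak hbk
        have hca : par.contains a = true := (h.dom a).mpr ⟨hadj.1, hak⟩
        have hcb : par.contains b = true := (h.dom b).mpr ⟨hadj.2.1, hbk⟩
        have h1 : pvFind par1 a = pvFind par1 b := by
          rw [root1_old a hca, root1_old b hcb]; exact h0
        have hca1 : par1.contains a = true := (dom1 a).mpr ⟨hadj.1, rega⟩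
        have hcb1 : par1.contains b = true := (dom1 b).mpr ⟨hadj.2.1, regb⟩
        exact pres3 _ _ (by rw [cont2]; exact hca1) (by rw [cont2]; exact hcb1)
          (pres2 _ _ hca1 hcb1 h1)
  · rw [if_pos (by simpa using hrect)]
    have hnotRct : ¬ Rct g rect (r, c) := fun hh => hrect hh.2.2.2.2
    refine ⟨?_, ?_, ?_⟩
    · intro x
      rw [h.dom x]
      constructor
      · rintro ⟨h1, h2⟩
        exact ⟨h1, (kltb_succ x r c).mpr (Or.inl h2)⟩
      · rintro ⟨h1, h2⟩
        rcases (kltb_succ x r c).mp h2 with h3 | h3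
        · exact ⟨h1, h3⟩
        · exact absurd (h3 ▸ h1) hnotRct
    · exact goodPar_mono g rect (fun z _ hz => (kltb_succ z r c).mpr (Or.inl hz)) h.good
    · intro a b hadj rega regb
      have hak : kltb a (r, c) = true := by
        rcases (kltb_succ a r c).mp rega with h2 | h2
        · exact h2
        · exact absurd (h2 ▸ hadj.1) hnotRct
      have hbk : kltb b (r, c) = true := by
        rcases (kltb_succ b r c).mp regb with h2 | h2
        · exact h2
        · exact absurd (h2 ▸ hadj.2.1) hnotRct
      exact h.edges a b hadj hak hbk

theorem pvUnions_spec (g : List (List Int)) (rect : Int) :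
    UFS g rect ((g.length : Int), 0)
      (pvUnions g (g.length : Int) ((g.headD []).length : Int) rect) := by
  rw [pvUnions_eq]
  refine foldl_pyRange_inv 0 (g.length : Int) (by positivity) _
    (fun k par => UFS g rect (k, 0) par) _ ?_ ?_
  · refine ⟨?_, ?_, ?_⟩
    · intro x
      rw [PySem.Dict.contains_empty]
      constructor
      · intro hh; cases hh
      · rintro ⟨h1, h2⟩
        rw [kltb_iff] at h2
        have := h1.1
        have := h1.2.2.1
        simp only at h2
        omega
    · intro k v hkv
      rw [PySem.Dict.get?_empty] at hkv
      cases hkv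
    · intro a b hadj rega _
      rw [kltb_iff] at rega
      have := hadj.1.1
      have := hadj.1.2.2.1
      simp only at rega
      omega
  · intro r par hr hrr hinv
    have hcols : (0 : Int) ≤ ((g.headD []).length : Int) := by positivity
    have hrow := foldl_pyRange_inv 0 ((g.headD []).length : Int) hcols (ufStep g rect r)
      (fun k par => UFS g rect (r, k) par) par hinv
      (fun c s hc hcc hi => uf_step g rect r c hr hrr hc hcc hi)
    exact ufs_congr
      (by
        intro x hx
        rw [kltb_iff, kltb_iff]
        have := hx.2.2.2.1
        have := hx.2.2.1
        simp only at *
        omega) hrow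

-- the two facts used downstream
theorem unions_contains (g : List (List Int)) (rect : Int) (x : Int × Int) :
    (pvUnions g (g.length : Int) ((g.headD []).length : Int) rect).contains x = true ↔
      Rct g rect x := by
  have h := pvUnions_spec g rect
  rw [h.dom x]
  constructor
  · exact fun hh => hh.1
  · intro hh
    refine ⟨hh, ?_⟩
    rw [kltb_iff]
    have := hh.1
    have := hh.2.1
    simp only
    omega

theorem rct_region (g : List (List Int)) (rect : Int) {z : Int × Int} (hz : Rct g rect z) :
    kltb z ((g.length : Int), 0) = true := by
  rw [kltb_iff]
  have := hz.2.1
  simp only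
  omega

theorem unions_root_iff (g : List (List Int)) (rect : Int) (x y : Int × Int)
    (hx : Rct g rect x) (hy : Rct g rect y) :
    (pvFind (pvUnions g (g.length : Int) ((g.headD []).length : Int) rect) x =
     pvFind (pvUnions g (g.length : Int) ((g.headD []).length : Int) rect) y) ↔
      Conn g rect x y := by
  have h := pvUnions_spec g rect
  constructor
  · intro heq
    have hxc := (unions_contains g rect x).mpr hx
    have hyc := (unions_contains g rect y).mpr hy
    have hx2 := (pvFind_spec g rect _ h.good (ufM _ x) x rfl hxc).2.2
    have hy2 := (pvFind_spec g rect _ h.good (ufM _ y) y rfl hyc).2.2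
    have h3 : Conn g rect y (pvFind (pvUnions g (g.length : Int) ((g.headD []).length : Int) rect) x) := by
      rw [heq]
      exact connP_toConn g rect _ hy2
    exact Relation.ReflTransGen.trans (connP_toConn g rect _ hx2) (conn_symm g rect h3)
  · intro hconn
    have hcp : ConnP g rect (fun z => kltb z ((g.length : Int), 0) = true) x y :=
      conn_toConnP g rect (fun z hz => rct_region g rect hz) hconn
    clear hconn hx hy
    induction hcp with
    | refl => rfl
    | tail h1 e ih =>
      exact ih.trans (h.edges _ _ e.1 e.2.1 e.2.2)

-- Part 5: BFS ---------------------------------------------------------------------------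

def InG (g : List (List Int)) (x : Int × Int) : Prop :=
  0 ≤ x.1 ∧ x.1 < (g.length : Int) ∧ 0 ≤ x.2 ∧ x.2 < ((g.headD []).length : Int)

theorem rct_iff (g : List (List Int)) (rect : Int) (x : Int × Int) :
    Rct g rect x ↔ (InG g x ∧ pvAt g x.1 x.2 = rect) := by
  unfold Rct InG
  tauto

def VT (v : List (List Bool)) (x : Int × Int) : Prop := pvVget v x.1 x.2 = true

def Vsh (g : List (List Int)) (v : List (List Bool)) : Prop :=
  v.length = g.length ∧ ∀ i < v.length, (v.getD i []).length = (g.headD []).length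

noncomputable def pvBox (g : List (List Int)) : Finset (Int × Int) :=
  Finset.Icc (0 : Int) ((g.length : Int) - 1) ×ˢ
    Finset.Icc (0 : Int) (((g.headD []).length : Int) - 1)

theorem mem_pvBox (g : List (List Int)) (x : Int × Int) : x ∈ pvBox g ↔ InG g x := by
  unfold pvBox InG
  rw [Finset.mem_product, Finset.mem_Icc, Finset.mem_Icc]
  omega

theorem card_pvBox (g : List (List Int)) :
    (pvBox g).card = g.length * (g.headD []).length := by
  unfold pvBox
  rw [Finset.card_product, Int.card_Icc, Int.card_Icc]
  simp

-- updating one in-grid cell of the visited structure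
theorem vt_set (g : List (List Int)) (v : List (List Bool)) (hsh : Vsh g v)
    {nd : Int × Int} (hin : InG g nd) (z : Int × Int) (hz : InG g z) :
    (VT (pvSet2 v nd.1 nd.2 true) z ↔ (z = nd ∨ VT v z)) := by
  obtain ⟨h1, h2, h3, h4⟩ := hin
  obtain ⟨g1, g2, g3, g4⟩ := hz
  have hl := hsh.1
  have hrow : (v.getD nd.1.toNat []).length = (g.headD []).length :=
    hsh.2 nd.1.toNat (by omega)
  unfold VT
  rw [pvVget_eq (pvSet2 v nd.1 nd.2 true) z.1 z.2 g1 g3, pvVget_eq v z.1 z.2 g1 g3,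
    vget_pvSet2 v nd.1 nd.2 true z.1.toNat z.2.toNat h1 h3 (by omega) (by rw [hrow]; omega)]
  by_cases he : nd.1.toNat = z.1.toNat ∧ nd.2.toNat = z.2.toNat
  · rw [if_pos he]
    have hzz : z = nd := by rw [Prod.ext_iff]; omega
    simp [hzz]
  · rw [if_neg he]
    have hzz : ¬ z = nd := by rw [Prod.ext_iff]; omega
    simp [hzz]

theorem vsh_set (g : List (List Int)) (v : List (List Bool)) (hsh : Vsh g v)
    (a b : Int) (w : Bool) : Vsh g (pvSet2 v a b w) := by
  refine ⟨by rw [length_pvSet2]; exact hsh.1, ?_⟩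
  intro i hi
  rw [length_pvSet2] at hi
  rw [getD_pvSet2_row]
  exact hsh.2 i hi

-- the direction-loop body of A's BFS, let-free
def bfsStep (g : List (List Int)) (rect x y : Int)
    (st : List (Int × Int) × List (List Bool)) (d : Int × Int) :
    List (Int × Int) × List (List Bool) :=
  if 0 ≤ x + d.1 ∧ x + d.1 < (g.length : Int) ∧ 0 ≤ y + d.2 ∧
      y + d.2 < ((g.headD []).length : Int) ∧ pvVget st.2 (x + d.1) (y + d.2) = false ∧
      pvAt g (x + d.1) (y + d.2) = rect then
    (st.1 ++ [(x + d.1, y + d.2)], pvSet2 st.2 (x + d.1) (y + d.2) true)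
  else st

theorem bfs_dirs (g : List (List Int)) (rect x y : Int) :
    ∀ (D : List (Int × Int)),
    (D.map (fun d => (x + d.1, y + d.2))).Nodup →
    ∀ (q0 : List (Int × Int)) (v0 : List (List Bool)) (W : Finset (Int × Int)),
    Vsh g v0 → (∀ z, InG g z → (VT v0 z ↔ z ∈ W)) →
    ∃ A : List (Int × Int),
      (D.foldl (bfsStep g rect x y) (q0, v0)).1 = q0 ++ A ∧
      Vsh g (D.foldl (bfsStep g rect x y) (q0, v0)).2 ∧
      (∀ z, InG g z →
        (VT (D.foldl (bfsStep g rect x y) (q0, v0)).2 z ↔ (z ∈ W ∨ z ∈ A))) ∧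
      (∀ z, z ∈ A ↔ (z ∈ D.map (fun d => (x + d.1, y + d.2)) ∧ Rct g rect z ∧ z ∉ W)) ∧
      A.Nodup := by
  intro D
  induction D with
  | nil =>
    intro _ q0 v0 W hsh hW
    refine ⟨[], by simp, hsh, ?_, by simp, List.nodup_nil⟩
    intro z hz
    simp [hW z hz]
  | cons d D ih =>
    intro hnd q0 v0 W hsh hW
    rw [List.map_cons, List.nodup_cons] at hnd
    rw [List.foldl_cons]
    by_cases hguard : 0 ≤ x + d.1 ∧ x + d.1 < (g.length : Int) ∧ 0 ≤ y + d.2 ∧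
        y + d.2 < ((g.headD []).length : Int) ∧ pvVget v0 (x + d.1) (y + d.2) = false ∧
        pvAt g (x + d.1) (y + d.2) = rect
    · have hstep : bfsStep g rect x y (q0, v0) d =
          (q0 ++ [(x + d.1, y + d.2)], pvSet2 v0 (x + d.1) (y + d.2) true) := by
        unfold bfsStep
        rw [if_pos hguard]
      rw [hstep]
      have hin : InG g (x + d.1, y + d.2) :=
        ⟨hguard.1, hguard.2.1, hguard.2.2.1, hguard.2.2.2.1⟩
      have hrct : Rct g rect (x + d.1, y + d.2) :=
        (rct_iff g rect _).mpr ⟨hin, hguard.2.2.2.2.2⟩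
      have hnotW : (x + d.1, y + d.2) ∉ W := by
        intro hmem
        have := (hW _ hin).mpr hmem
        unfold VT at this
        rw [hguard.2.2.2.2.1] at this
        cases this
      have hsh1 : Vsh g (pvSet2 v0 (x + d.1) (y + d.2) true) := vsh_set g v0 hsh _ _ _
      have hW1 : ∀ z, InG g z →
          (VT (pvSet2 v0 (x + d.1) (y + d.2) true) z ↔ z ∈ insert (x + d.1, y + d.2) W) := by
        intro z hz
        rw [show pvSet2 v0 (x + d.1) (y + d.2) true =
          pvSet2 v0 ((x + d.1, y + d.2) : Int × Int).1 ((x + d.1, y + d.2) : Int × Int).2 true from rfl]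
        rw [vt_set g v0 hsh hin z hz, Finset.mem_insert, hW z hz]
      obtain ⟨A, hA1, hA2, hA3, hA4, hA5⟩ :=
        ih hnd.2 (q0 ++ [(x + d.1, y + d.2)]) _ (insert (x + d.1, y + d.2) W) hsh1 hW1
      refine ⟨(x + d.1, y + d.2) :: A, by rw [hA1]; simp, hA2, ?_, ?_, ?_⟩
      · intro z hz
        rw [hA3 z hz, Finset.mem_insert]
        constructor
        · rintro (⟨h1 | h1⟩ | h1)
          · exact Or.inr (by simp [h1])
          · exact Or.inl h1
          · exact Or.inr (by simp [h1])
        · rintro (h1 | h1)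
          · exact Or.inl (Or.inr h1)
          · rcases List.mem_cons.mp h1 with h2 | h2
            · exact Or.inl (Or.inl h2)
            · exact Or.inr h2
      · intro z
        rw [List.mem_cons, hA4 z, List.map_cons, List.mem_cons, Finset.mem_insert]
        constructor
        · rintro (rfl | ⟨h1, h2, h3⟩)
          · exact ⟨Or.inl rfl, hrct, hnotW⟩
          · exact ⟨Or.inr h1, h2, fun hh => h3 (Or.inr hh)⟩
        · rintro ⟨h1 | h1, h2, h3⟩
          · exact Or.inl h1
          · by_cases hz : z = (x + d.1, y + d.2)
            · exact Or.inl hz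
            · exact Or.inr ⟨h1, h2, fun hh => by
                rcases hh with hh | hh
                · exact hz hh
                · exact h3 hh⟩
      · rw [List.nodup_cons]
        refine ⟨fun hmem => ?_, hA5⟩
        have := ((hA4 _).mp hmem).1
        exact hnd.1 this
    · have hstep : bfsStep g rect x y (q0, v0) d = (q0, v0) := by
        unfold bfsStep
        rw [if_neg hguard]
      rw [hstep]
      obtain ⟨A, hA1, hA2, hA3, hA4, hA5⟩ := ih hnd.2 q0 v0 W hsh hW
      refine ⟨A, hA1, hA2, hA3, ?_, hA5⟩
      intro z
      rw [hA4 z, List.map_cons, List.mem_cons]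
      constructor
      · rintro ⟨h1, h2, h3⟩
        exact ⟨Or.inr h1, h2, h3⟩
      · rintro ⟨h1 | h1, h2, h3⟩
        · exfalso
          subst h1
          have hin := ((rct_iff g rect _).mp h2).1
          refine hguard ⟨hin.1, hin.2.1, hin.2.2.1, hin.2.2.2, ?_, ((rct_iff g rect _).mp h2).2⟩
          have := hW _ hin
          unfold VT at this
          rcases hvb : pvVget v0 (x + d.1) (y + d.2) with _ | _
          · rfl
          · exact absurd ((this).mp hvb) h3
        · exact ⟨h1, h2, h3⟩

def pvDirs : List (Int × Int) := [(-1, 0), (1, 0), (0, -1), (0, 1)]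

theorem pvDirs_nodup (x y : Int) :
    (pvDirs.map (fun d => (x + d.1, y + d.2))).Nodup := by
  simp [pvDirs, Prod.ext_iff]

theorem adj_of_nbr {g : List (List Int)} {rect : Int} {x y : Int} {z : Int × Int}
    (hmem : z ∈ pvDirs.map (fun d => (x + d.1, y + d.2)))
    (hcur : Rct g rect (x, y)) (hz : Rct g rect z) : Adjc g rect (x, y) z := by
  refine ⟨hcur, hz, ?_⟩
  simp [pvDirs] at hmem
  rcases hmem with h | h | h | h <;> subst h <;> simp

theorem nbr_of_adj {g : List (List Int)} {rect : Int} {x y : Int} {z : Int × Int}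
    (hadj : Adjc g rect (x, y) z) :
    z ∈ pvDirs.map (fun d => (x + d.1, y + d.2)) := by
  obtain ⟨_, _, hd⟩ := hadj
  simp only at hd
  simp [pvDirs, Prod.ext_iff]
  omega

theorem pvBfs_nil (g : List (List Int)) (rows cols rect : Int) (fuel : Nat)
    (v : List (List Bool)) (comp : List (Int × Int)) :
    pvBfs g rows cols rect fuel [] v comp = (comp, v) := by
  cases fuel <;> rfl

theorem pvBfs_cons (g : List (List Int)) (rect : Int) (fuel : Nat) (x y : Int)
    (q : List (Int × Int)) (v : List (List Bool)) (comp : List (Int × Int)) :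
    pvBfs g (g.length : Int) ((g.headD []).length : Int) rect (fuel + 1) ((x, y) :: q) v comp =
      pvBfs g (g.length : Int) ((g.headD []).length : Int) rect fuel
        (pvDirs.foldl (bfsStep g rect x y) (q, v)).1
        (pvDirs.foldl (bfsStep g rect x y) (q, v)).2 (comp ++ [(x, y)]) := rfl

theorem bfs_go (g : List (List Int)) (rect : Int) (s : Int × Int) (V0 : Finset (Int × Int))
    (_hV0 : ∀ x ∈ V0, Rct g rect x ∧ ¬ Conn g rect s x) :
    ∀ (fuel : Nat) (q comp : List (Int × Int)) (v : List (List Bool)) (W : Finset (Int × Int)),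
    Vsh g v →
    (∀ z, InG g z → (VT v z ↔ z ∈ W)) →
    (∀ z, z ∈ W ↔ (z ∈ V0 ∨ z ∈ comp ∨ z ∈ q)) →
    W ⊆ pvBox g →
    (∀ z, z ∈ comp ∨ z ∈ q → Rct g rect z ∧ Conn g rect s z) →
    (∀ z ∈ comp, ∀ w, Adjc g rect z w → VT v w) →
    q.length + ((pvBox g).card - W.card) ≤ fuel →
    Vsh g (pvBfs g (g.length : Int) ((g.headD []).length : Int) rect fuel q v comp).2 ∧
    (∀ z, InG g z →
      (VT (pvBfs g (g.length : Int) ((g.headD []).length : Int) rect fuel q v comp).2 z ↔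
        (z ∈ V0 ∨ z ∈ (pvBfs g (g.length : Int) ((g.headD []).length : Int) rect fuel q v comp).1))) ∧
    (∀ z, z ∈ (pvBfs g (g.length : Int) ((g.headD []).length : Int) rect fuel q v comp).1 →
      Rct g rect z ∧ Conn g rect s z) ∧
    (∀ z, z ∈ (pvBfs g (g.length : Int) ((g.headD []).length : Int) rect fuel q v comp).1 →
      ∀ w, Adjc g rect z w →
        (w ∈ V0 ∨ w ∈ (pvBfs g (g.length : Int) ((g.headD []).length : Int) rect fuel q v comp).1)) ∧
    (∀ z, z ∈ comp ∨ z ∈ q →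
      z ∈ (pvBfs g (g.length : Int) ((g.headD []).length : Int) rect fuel q v comp).1) := by
  intro fuel
  induction fuel with
  | zero =>
    intro q comp v W hsh hWv hWeq hWbox hcq hcl hfuel
    have hq : q = [] := by
      cases q with
      | nil => rfl
      | cons a t => simp at hfuel
    subst hq
    rw [pvBfs_nil]
    refine ⟨hsh, ?_, ?_, ?_, ?_⟩
    · intro z hz
      rw [hWv z hz, hWeq z]
      simp
    · intro z hz
      exact hcq z (Or.inl hz)
    · intro z hz w hadj
      have hvt := hcl z hz w hadj
      have hwin : InG g w := ((rct_iff g rect w).mp hadj.2.1).1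
      have := (hWeq w).mp ((hWv w hwin).mp hvt)
      simpa using this
    · intro z hz
      rcases hz with hz | hz
      · exact hz
      · cases hz
  | succ fuel ih =>
    intro q comp v W hsh hWv hWeq hWbox hcq hcl hfuel
    cases q with
    | nil =>
      rw [pvBfs_nil]
      refine ⟨hsh, ?_, ?_, ?_, ?_⟩
      · intro z hz
        rw [hWv z hz, hWeq z]
        simp
      · intro z hz
        exact hcq z (Or.inl hz)
      · intro z hz w hadj
        have hvt := hcl z hz w hadj
        have hwin : InG g w := ((rct_iff g rect w).mp hadj.2.1).1
        have := (hWeq w).mp ((hWv w hwin).mp hvt)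
        simpa using this
      · intro z hz
        rcases hz with hz | hz
        · exact hz
        · cases hz
    | cons cur q' =>
      obtain ⟨x, y⟩ := cur
      rw [pvBfs_cons]
      obtain ⟨A, hA1, hA2, hA3, hA4, hA5⟩ :=
        bfs_dirs g rect x y pvDirs (pvDirs_nodup x y) q' v W hsh hWv
      have hcur : Rct g rect (x, y) ∧ Conn g rect s (x, y) :=
        hcq (x, y) (Or.inr (by simp))
      have hArct : ∀ z ∈ A, Rct g rect z := fun z hz => ((hA4 z).mp hz).2.1
      have hAconn : ∀ z ∈ A, Conn g rect s z := by
        intro z hz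
        obtain ⟨hm, hr, _⟩ := (hA4 z).mp hz
        exact Relation.ReflTransGen.tail hcur.2 (adj_of_nbr hm hcur.1 hr)
      have hAdisj : ∀ z ∈ A, z ∉ W := fun z hz => ((hA4 z).mp hz).2.2
      have hWcard : (W ∪ A.toFinset).card = W.card + A.length := by
        rw [Finset.card_union_of_disjoint, List.toFinset_card_of_nodup hA5]
        rw [Finset.disjoint_right]
        intro z hz
        exact hAdisj z (List.mem_toFinset.mp hz)
      have hWbox' : W ∪ A.toFinset ⊆ pvBox g := by
        intro z hz
        rcases Finset.mem_union.mp hz with hz | hz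
        · exact hWbox hz
        · rw [mem_pvBox]
          exact ((rct_iff g rect z).mp (hArct z (List.mem_toFinset.mp hz))).1
      have happly := ih (pvDirs.foldl (bfsStep g rect x y) (q', v)).1
        (comp ++ [(x, y)]) (pvDirs.foldl (bfsStep g rect x y) (q', v)).2
        (W ∪ A.toFinset) hA2
        (by
          intro z hz
          rw [hA3 z hz, Finset.mem_union, List.mem_toFinset])
        (by
          intro z
          rw [Finset.mem_union, List.mem_toFinset, hWeq z, hA1]
          simp only [List.mem_append, List.mem_cons]
          tauto)
        hWbox'
        (by
          intro z hz
          rcases hz with hz | hz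
          · rcases List.mem_append.mp hz with hz | hz
            · exact hcq z (Or.inl hz)
            · rw [List.mem_singleton] at hz
              subst hz
              exact hcur
          · rw [hA1, List.mem_append] at hz
            rcases hz with hz | hz
            · exact hcq z (Or.inr (by simp [hz]))
            · exact ⟨hArct z hz, hAconn z hz⟩)
        (by
          intro z hz w hadj
          have hwin : InG g w := ((rct_iff g rect w).mp hadj.2.1).1
          rw [hA3 w hwin]
          rcases List.mem_append.mp hz with hz | hz
          · exact Or.inl ((hWv w hwin).mp (hcl z hz w hadj))
          · rw [List.mem_singleton] at hz
            subst hz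
            have hm := nbr_of_adj hadj
            by_cases hw : w ∈ W
            · exact Or.inl hw
            · exact Or.inr ((hA4 w).mpr ⟨hm, hadj.2.1, hw⟩))
        (by
          rw [List.length_cons] at hfuel
          have hsub := Finset.card_le_card hWbox'
          have hsub2 := Finset.card_le_card hWbox
          rw [hA1, List.length_append, hWcard]
          omega)
      rw [hA1] at happly ⊢
      refine ⟨happly.1, happly.2.1, happly.2.2.1, happly.2.2.2.1, ?_⟩
      intro z hz
      apply happly.2.2.2.2
      rcases hz with hz | hz
      · exact Or.inl (List.mem_append.mpr (Or.inl hz))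
      · rcases List.mem_cons.mp hz with hz | hz
        · exact Or.inl (List.mem_append.mpr (Or.inr (by simp [hz])))
        · exact Or.inr (List.mem_append.mpr (Or.inl hz))

-- Part 5b: the component scan ----------------------------------------------------------

def compStep (g : List (List Int)) (rect r : Int)
    (st : List (List Bool) × List (List (Int × Int))) (c : Int) :
    List (List Bool) × List (List (Int × Int)) :=
  if pvVget st.1 r c = false ∧ pvAt g r c = rect then
    ((pvBfs g (g.length : Int) ((g.headD []).length : Int) rect
        (((g.length : Int) * ((g.headD []).length : Int)).toNat + 1) [(r, c)]
        (pvSet2 st.1 r c true) []).2,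
     st.2 ++ [(pvBfs g (g.length : Int) ((g.headD []).length : Int) rect
        (((g.length : Int) * ((g.headD []).length : Int)).toNat + 1) [(r, c)]
        (pvSet2 st.1 r c true) []).1])
  else st

def pvVis0 (g : List (List Int)) : List (List Bool) :=
  (List.range ((g.length : Int)).toNat).map
    (fun _ => (List.range (((g.headD []).length : Int)).toNat).map (fun _ => false))

theorem pvComponents_eq (g : List (List Int)) (rect : Int) :
    pvComponents g (g.length : Int) ((g.headD []).length : Int) rect =
      ((PySem.List.pyRange 0 (g.length : Int) 1).foldl (fun st r =>
        (PySem.List.pyRange 0 ((g.headD []).length : Int) 1).foldl (compStep g rect r) st)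
        (pvVis0 g, [])).2 := rfl

def CInv (g : List (List Int)) (rect : Int) (bnd : Int × Int)
    (st : List (List Bool) × List (List (Int × Int))) : Prop :=
  Vsh g st.1 ∧
  (∀ z, InG g z → (VT st.1 z ↔ ∃ comp ∈ st.2, z ∈ comp)) ∧
  (∀ comp ∈ st.2, ∃ sd, sd ∈ comp ∧
    ∀ z, (z ∈ comp ↔ (Rct g rect z ∧ Conn g rect sd z))) ∧
  (∀ z, Rct g rect z → kltb z bnd = true → VT st.1 z)

theorem vsh_vis0 (g : List (List Int)) : Vsh g (pvVis0 g) := by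
  unfold pvVis0 Vsh
  refine ⟨by simp, ?_⟩
  intro i hi
  simp only [List.length_map, List.length_range, Int.toNat_natCast] at hi
  rw [List.getD_eq_getElem?_getD, List.getElem?_map,
    List.getElem?_range (by simpa using hi)]
  simp

theorem vt_vis0 (g : List (List Int)) (z : Int × Int) (hz : InG g z) :
    ¬ VT (pvVis0 g) z := by
  obtain ⟨h1, h2, h3, h4⟩ := hz
  unfold VT pvVis0
  rw [pvVget_eq _ _ _ h1 h3]
  intro hv
  simp only [List.getD_eq_getElem?_getD, List.getElem?_map] at hv
  rcases hro : (List.range ((g.length : Int)).toNat)[z.1.toNat]? with _ | a <;> rw [hro] at hv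
  · simp at hv
  · simp only [Option.map_some, Option.getD_some, List.getElem?_map] at hv
    rcases hco : (List.range (((g.headD []).length : Int)).toNat)[z.2.toNat]? with _ | b <;>
      rw [hco] at hv <;> simp at hv

theorem comp_step (g : List (List Int)) (rect : Int) (r c : Int)
    (hr : 0 ≤ r) (hrr : r < (g.length : Int)) (hc : 0 ≤ c)
    (hcc : c < ((g.headD []).length : Int)) {st}
    (h : CInv g rect (r, c) st) : CInv g rect (r, c + 1) (compStep g rect r st c) := by
  obtain ⟨hsh, hvt, hcls, hcov⟩ := h
  unfold compStep
  by_cases hguard : pvVget st.1 r c = false ∧ pvAt g r c = rect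
  · rw [if_pos hguard]
    have hsrct : Rct g rect (r, c) := ⟨hr, hrr, hc, hcc, hguard.2⟩
    have hsing : InG g (r, c) := ⟨hr, hrr, hc, hcc⟩
    have hsnv : ¬ VT st.1 (r, c) := by
      unfold VT
      rw [hguard.1]
      simp
    have hV0 : ∀ x ∈ (st.2.flatten).toFinset,
        Rct g rect x ∧ ¬ Conn g rect (r, c) x := by
      intro x hx
      rw [List.mem_toFinset, List.mem_flatten] at hx
      obtain ⟨C, hC, hxC⟩ := hx
      obtain ⟨sd, hsd, hchar⟩ := hcls C hC
      have hx2 := (hchar x).mp hxC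
      refine ⟨hx2.1, fun hconn => ?_⟩
      have hs_in : (r, c) ∈ C := (hchar (r, c)).mpr
        ⟨hsrct, Relation.ReflTransGen.trans hx2.2 (conn_symm g rect hconn)⟩
      exact hsnv ((hvt (r, c) hsing).mpr ⟨C, hC, hs_in⟩)
    have hW : ∀ z, InG g z →
        (VT (pvSet2 st.1 r c true) z ↔ z ∈ insert ((r, c) : Int × Int) (st.2.flatten).toFinset) := by
      intro z hz
      rw [show pvSet2 st.1 r c true =
        pvSet2 st.1 ((r, c) : Int × Int).1 ((r, c) : Int × Int).2 true from rfl,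
        vt_set g st.1 hsh hsing z hz, Finset.mem_insert, hvt z hz,
        List.mem_toFinset, List.mem_flatten]
    have hbfs := bfs_go g rect (r, c) (st.2.flatten).toFinset hV0
      ((((g.length : Int)) * (((g.headD []).length : Int))).toNat + 1)
      [(r, c)] [] (pvSet2 st.1 r c true)
      (insert ((r, c) : Int × Int) (st.2.flatten).toFinset)
      (vsh_set g st.1 hsh r c true) hW
      (by
        intro z
        rw [Finset.mem_insert, List.mem_toFinset, List.mem_flatten]
        simp only [List.not_mem_nil, List.mem_singleton, false_or]
        exact or_comm)
      (by
        intro z hz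
        rw [mem_pvBox]
        rcases Finset.mem_insert.mp hz with rfl | hz
        · exact hsing
        · exact ((rct_iff g rect z).mp (hV0 z hz).1).1)
      (by
        rintro z (hz | hz)
        · cases hz
        · rw [List.mem_singleton] at hz
          subst hz
          exact ⟨hsrct, Relation.ReflTransGen.refl⟩)
      (by rintro z hz; cases hz)
      (by
        have hcard : (insert ((r, c) : Int × Int) (st.2.flatten).toFinset).card ≥ 1 :=
          Finset.card_pos.mpr ⟨(r, c), Finset.mem_insert_self _ _⟩
        have hbox : (pvBox g).card = g.length * (g.headD []).length := card_pvBox g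
        have : (((g.length : Int)) * (((g.headD []).length : Int))).toNat =
            g.length * (g.headD []).length := by
          rw [← Nat.cast_mul, Int.toNat_natCast]
        simp only [List.length_singleton]
        omega)
    obtain ⟨ha, hb, hc2, hd, he⟩ := hbfs
    set res := pvBfs g (g.length : Int) ((g.headD []).length : Int) rect
      (((g.length : Int) * ((g.headD []).length : Int)).toNat + 1) [(r, c)]
      (pvSet2 st.1 r c true) [] with hres
    have hclass : ∀ z, z ∈ res.1 ↔ (Rct g rect z ∧ Conn g rect (r, c) z) := by
      intro z
      constructor
      · exact fun hz => hc2 z hz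
      · rintro ⟨hrct, hconn⟩
        have main : ∀ w, Conn g rect (r, c) w → w = (r, c) ∨ Rct g rect w → w ∈ res.1 := by
          intro w hw
          induction hw with
          | refl => exact fun _ => he (r, c) (Or.inr (by simp))
          | tail h1 e ihh =>
            intro _
            have hb_in := ihh (Or.inr e.1)
            rcases hd _ hb_in _ e with hw | hw
            · exfalso
              exact (hV0 _ hw).2 (Relation.ReflTransGen.tail h1 e)
            · exact hw
        exact main z hconn (Or.inr hrct)
    refine ⟨ha, ?_, ?_, ?_⟩
    · intro z hz
      rw [hb z hz]
      simp only [List.mem_append, List.mem_singleton]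
      constructor
      · rintro (h1 | h1)
        · rw [List.mem_toFinset, List.mem_flatten] at h1
          obtain ⟨C, hC, hzC⟩ := h1
          exact ⟨C, Or.inl hC, hzC⟩
        · exact ⟨res.1, Or.inr rfl, h1⟩
      · rintro ⟨C, hC | hC, hzC⟩
        · exact Or.inl (List.mem_toFinset.mpr (List.mem_flatten.mpr ⟨C, hC, hzC⟩))
        · subst hC
          exact Or.inr hzC
    · intro C hC
      rcases List.mem_append.mp hC with hC | hC
      · exact hcls C hC
      · rw [List.mem_singleton] at hC
        subst hC
        exact ⟨(r, c), he (r, c) (Or.inr (by simp)), hclass⟩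
    · intro z hrct hreg
      have hzin : InG g z := ((rct_iff g rect z).mp hrct).1
      rw [hb z hzin]
      rcases (kltb_succ z r c).mp hreg with h1 | h1
      · have := hcov z hrct h1
        rw [hvt z hzin] at this
        obtain ⟨C, hC, hzC⟩ := this
        exact Or.inl (List.mem_toFinset.mpr (List.mem_flatten.mpr ⟨C, hC, hzC⟩))
      · subst h1
        exact Or.inr (he (r, c) (Or.inr (by simp)))
  · rw [if_neg hguard]
    refine ⟨hsh, hvt, hcls, ?_⟩
    intro z hrct hreg
    rcases (kltb_succ z r c).mp hreg with h1 | h1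
    · exact hcov z hrct h1
    · subst h1
      rcases hvb : pvVget st.1 r c with _ | _
      · exact absurd ⟨hvb, hrct.2.2.2.2⟩ hguard
      · exact hvb

theorem pvComponents_spec (g : List (List Int)) (rect : Int) :
    (∀ comp ∈ pvComponents g (g.length : Int) ((g.headD []).length : Int) rect,
      ∃ sd, sd ∈ comp ∧ ∀ z, (z ∈ comp ↔ (Rct g rect z ∧ Conn g rect sd z))) ∧
    (∀ z, Rct g rect z →
      ∃ comp ∈ pvComponents g (g.length : Int) ((g.headD []).length : Int) rect,
        z ∈ comp) := by
  rw [pvComponents_eq]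
  have main : CInv g rect ((g.length : Int), 0)
      ((PySem.List.pyRange 0 (g.length : Int) 1).foldl (fun st r =>
        (PySem.List.pyRange 0 ((g.headD []).length : Int) 1).foldl (compStep g rect r) st)
        (pvVis0 g, [])) := by
    refine foldl_pyRange_inv 0 (g.length : Int) (by positivity) _
      (fun k st => CInv g rect (k, 0) st) _ ?_ ?_
    · refine ⟨vsh_vis0 g, ?_, ?_, ?_⟩
      · intro z hz
        constructor
        · intro hv
          exact absurd hv (vt_vis0 g z hz)
        · rintro ⟨C, hC, _⟩
          cases hC
      · intro C hC
        cases hC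
      · intro z hrct hreg
        rw [kltb_iff] at hreg
        have := hrct.1
        have := hrct.2.2.1
        simp only at hreg
        omega
    · intro r st hr hrr hinv
      have hcols : (0 : Int) ≤ ((g.headD []).length : Int) := by positivity
      have hrow := foldl_pyRange_inv 0 ((g.headD []).length : Int) hcols (compStep g rect r)
        (fun k st => CInv g rect (r, k) st) st hinv
        (fun c s hc hcc hi => comp_step g rect r c hr hrr hc hcc hi)
      obtain ⟨c1, c2, c3, c4⟩ := hrow
      refine ⟨c1, c2, c3, ?_⟩
      intro z hrct hreg
      refine c4 z hrct ?_
      rw [kltb_iff] at *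
      have := hrct.2.2.1
      have := hrct.2.2.2.1
      simp only at *
      omega
  have hvchar := main.2.1
  obtain ⟨_, _, hcls, hcov⟩ := main
  refine ⟨hcls, ?_⟩
  intro z hrct
  have hvt := hcov z hrct (by
    rw [kltb_iff]
    have := hrct.2.1
    simp only
    omega)
  exact (hvchar z ((rct_iff g rect z).mp hrct).1).mp hvt

-- Part 6: the bounding-box scan --------------------------------------------------------

def infoStep (g : List (List Int)) (rect r : Int)
    (par : PySem.Dict (Int × Int) (Int × Int))
    (info : PySem.Dict (Int × Int) (Int × Int × Int × Int)) (c : Int) :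
    PySem.Dict (Int × Int) (Int × Int × Int × Int) :=
  if pvAt g r c = rect then
    match info.get? (pvFind par (r, c)) with
    | some (a, b, d, e) =>
      info.insert (pvFind par (r, c)) (min a r, max b r, min d c, max e c)
    | none => info.insert (pvFind par (r, c)) (r, r, c, c)
  else info

theorem pvInfo_eq (g : List (List Int)) (rect : Int)
    (par : PySem.Dict (Int × Int) (Int × Int)) :
    pvInfo g (g.length : Int) ((g.headD []).length : Int) rect par =
      (PySem.List.pyRange 0 (g.length : Int) 1).foldl (fun info r =>
        (PySem.List.pyRange 0 ((g.headD []).length : Int) 1).foldl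
          (infoStep g rect r par) info) PySem.Dict.empty := rfl

def IInv (g : List (List Int)) (rect : Int) (par : PySem.Dict (Int × Int) (Int × Int))
    (bnd : Int × Int) (info : PySem.Dict (Int × Int) (Int × Int × Int × Int)) : Prop :=
  ∀ ρ : Int × Int,
    (info.get? ρ = none →
      ∀ z, Rct g rect z → kltb z bnd = true → pvFind par z ≠ ρ) ∧
    (∀ bb : Int × Int × Int × Int, info.get? ρ = some bb →
      ((∃ z, Rct g rect z ∧ kltb z bnd = true ∧ pvFind par z = ρ ∧ z.1 = bb.1) ∧
       (∃ z, Rct g rect z ∧ kltb z bnd = true ∧ pvFind par z = ρ ∧ z.1 = bb.2.1) ∧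
       (∃ z, Rct g rect z ∧ kltb z bnd = true ∧ pvFind par z = ρ ∧ z.2 = bb.2.2.1) ∧
       (∃ z, Rct g rect z ∧ kltb z bnd = true ∧ pvFind par z = ρ ∧ z.2 = bb.2.2.2)) ∧
      (∀ z, Rct g rect z → kltb z bnd = true → pvFind par z = ρ →
        bb.1 ≤ z.1 ∧ z.1 ≤ bb.2.1 ∧ bb.2.2.1 ≤ z.2 ∧ z.2 ≤ bb.2.2.2))

theorem info_step (g : List (List Int)) (rect : Int)
    (par : PySem.Dict (Int × Int) (Int × Int)) (r c : Int)
    (hr : 0 ≤ r) (hrr : r < (g.length : Int)) (hc : 0 ≤ c)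
    (hcc : c < ((g.headD []).length : Int)) {info}
    (h : IInv g rect par (r, c) info) :
    IInv g rect par (r, c + 1) (infoStep g rect r par info c) := by
  unfold infoStep
  by_cases hrect : pvAt g r c = rect
  · rw [if_pos hrect]
    have hsrct : Rct g rect (r, c) := ⟨hr, hrr, hc, hcc, hrect⟩
    have hreg : kltb ((r, c) : Int × Int) (r, c + 1) = true := (kltb_succ _ r c).mpr (Or.inr rfl)
    rcases hget : info.get? (pvFind par (r, c)) with _ | bb
    · -- fresh root
      intro ρ
      constructor
      · intro hnone z hz hzreg
        rw [PySem.Dict.get?_insert] at hnone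
        by_cases hρ : ρ = pvFind par (r, c)
        · rw [if_pos hρ] at hnone
          cases hnone
        · rw [if_neg hρ] at hnone
          rcases (kltb_succ z r c).mp hzreg with h1 | h1
          · exact (h ρ).1 hnone z hz h1
          · subst h1
            exact fun hh => hρ (hh ▸ rfl)
      · intro bb' hbb'
        rw [PySem.Dict.get?_insert] at hbb'
        by_cases hρ : ρ = pvFind par (r, c)
        · rw [if_pos hρ] at hbb'
          cases hbb'
          subst hρ
          refine ⟨⟨⟨(r, c), hsrct, hreg, rfl, rfl⟩, ⟨(r, c), hsrct, hreg, rfl, rfl⟩,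
            ⟨(r, c), hsrct, hreg, rfl, rfl⟩, ⟨(r, c), hsrct, hreg, rfl, rfl⟩⟩, ?_⟩
          intro z hz hzreg hzρ
          rcases (kltb_succ z r c).mp hzreg with h1 | h1
          · exact absurd hzρ ((h _).1 hget z hz h1)
          · subst h1
            simp only
            omega
        · rw [if_neg hρ] at hbb'
          obtain ⟨⟨w1, w2, w3, w4⟩, hbound⟩ := (h ρ).2 bb' hbb'
          refine ⟨⟨?_, ?_, ?_, ?_⟩, ?_⟩
          · obtain ⟨z, a1, a2, a3, a4⟩ := w1
            exact ⟨z, a1, (kltb_succ z r c).mpr (Or.inl a2), a3, a4⟩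
          · obtain ⟨z, a1, a2, a3, a4⟩ := w2
            exact ⟨z, a1, (kltb_succ z r c).mpr (Or.inl a2), a3, a4⟩
          · obtain ⟨z, a1, a2, a3, a4⟩ := w3
            exact ⟨z, a1, (kltb_succ z r c).mpr (Or.inl a2), a3, a4⟩
          · obtain ⟨z, a1, a2, a3, a4⟩ := w4
            exact ⟨z, a1, (kltb_succ z r c).mpr (Or.inl a2), a3, a4⟩
          · intro z hz hzreg hzρ
            rcases (kltb_succ z r c).mp hzreg with h1 | h1
            · exact hbound z hz h1 hzρ
            · subst h1
              exact absurd hzρ (fun hh => hρ (hh ▸ rfl))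
    · -- existing root
      obtain ⟨a, b, d, e⟩ := bb
      intro ρ
      constructor
      · intro hnone z hz hzreg
        rw [PySem.Dict.get?_insert] at hnone
        by_cases hρ : ρ = pvFind par (r, c)
        · rw [if_pos hρ] at hnone
          cases hnone
        · rw [if_neg hρ] at hnone
          rcases (kltb_succ z r c).mp hzreg with h1 | h1
          · exact (h ρ).1 hnone z hz h1
          · subst h1
            exact fun hh => hρ (hh ▸ rfl)
      · intro bb' hbb'
        rw [PySem.Dict.get?_insert] at hbb'
        by_cases hρ : ρ = pvFind par (r, c)
        · rw [if_pos hρ] at hbb'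
          cases hbb'
          subst hρ
          obtain ⟨⟨w1, w2, w3, w4⟩, hbound⟩ := (h _).2 (a, b, d, e) hget
          refine ⟨⟨?_, ?_, ?_, ?_⟩, ?_⟩
          · rcases le_total a r with hmin | hmin
            · obtain ⟨z, a1, a2, a3, a4⟩ := w1
              exact ⟨z, a1, (kltb_succ z r c).mpr (Or.inl a2), a3,
                by simp only at a4 ⊢; omega⟩
            · exact ⟨(r, c), hsrct, hreg, rfl, by simp only; omega⟩
          · rcases le_total b r with hmax | hmax
            · exact ⟨(r, c), hsrct, hreg, rfl, by simp only; omega⟩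
            · obtain ⟨z, a1, a2, a3, a4⟩ := w2
              exact ⟨z, a1, (kltb_succ z r c).mpr (Or.inl a2), a3,
                by simp only at a4 ⊢; omega⟩
          · rcases le_total d c with hmin | hmin
            · obtain ⟨z, a1, a2, a3, a4⟩ := w3
              exact ⟨z, a1, (kltb_succ z r c).mpr (Or.inl a2), a3,
                by simp only at a4 ⊢; omega⟩
            · exact ⟨(r, c), hsrct, hreg, rfl, by simp only; omega⟩
          · rcases le_total e c with hmax | hmax
            · exact ⟨(r, c), hsrct, hreg, rfl, by simp only; omega⟩
            · obtain ⟨z, a1, a2, a3, a4⟩ := w4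
              exact ⟨z, a1, (kltb_succ z r c).mpr (Or.inl a2), a3,
                by simp only at a4 ⊢; omega⟩
          · intro z hz hzreg hzρ
            rcases (kltb_succ z r c).mp hzreg with h1 | h1
            · have := hbound z hz h1 hzρ
              simp only at this ⊢
              omega
            · subst h1
              simp only
              omega
        · rw [if_neg hρ] at hbb'
          obtain ⟨⟨w1, w2, w3, w4⟩, hbound⟩ := (h ρ).2 bb' hbb'
          refine ⟨⟨?_, ?_, ?_, ?_⟩, ?_⟩
          · obtain ⟨z, a1, a2, a3, a4⟩ := w1
            exact ⟨z, a1, (kltb_succ z r c).mpr (Or.inl a2), a3, a4⟩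
          · obtain ⟨z, a1, a2, a3, a4⟩ := w2
            exact ⟨z, a1, (kltb_succ z r c).mpr (Or.inl a2), a3, a4⟩
          · obtain ⟨z, a1, a2, a3, a4⟩ := w3
            exact ⟨z, a1, (kltb_succ z r c).mpr (Or.inl a2), a3, a4⟩
          · obtain ⟨z, a1, a2, a3, a4⟩ := w4
            exact ⟨z, a1, (kltb_succ z r c).mpr (Or.inl a2), a3, a4⟩
          · intro z hz hzreg hzρ
            rcases (kltb_succ z r c).mp hzreg with h1 | h1
            · exact hbound z hz h1 hzρ
            · subst h1
              exact absurd hzρ (fun hh => hρ (hh ▸ rfl))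
  · rw [if_neg hrect]
    intro ρ
    constructor
    · intro hnone z hz hzreg
      rcases (kltb_succ z r c).mp hzreg with h1 | h1
      · exact (h ρ).1 hnone z hz h1
      · subst h1
        exact absurd hz.2.2.2.2 hrect
    · intro bb hbb
      obtain ⟨hw, hbound⟩ := (h ρ).2 bb hbb
      refine ⟨⟨?_, ?_, ?_, ?_⟩, ?_⟩
      · obtain ⟨z, a1, a2, a3, a4⟩ := hw.1
        exact ⟨z, a1, (kltb_succ z r c).mpr (Or.inl a2), a3, a4⟩
      · obtain ⟨z, a1, a2, a3, a4⟩ := hw.2.1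
        exact ⟨z, a1, (kltb_succ z r c).mpr (Or.inl a2), a3, a4⟩
      · obtain ⟨z, a1, a2, a3, a4⟩ := hw.2.2.1
        exact ⟨z, a1, (kltb_succ z r c).mpr (Or.inl a2), a3, a4⟩
      · obtain ⟨z, a1, a2, a3, a4⟩ := hw.2.2.2
        exact ⟨z, a1, (kltb_succ z r c).mpr (Or.inl a2), a3, a4⟩
      · intro z hz hzreg hzρ
        rcases (kltb_succ z r c).mp hzreg with h1 | h1
        · exact hbound z hz h1 hzρ
        · subst h1
          exact absurd hz.2.2.2.2 hrect

theorem pvInfo_spec (g : List (List Int)) (rect : Int)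
    (par : PySem.Dict (Int × Int) (Int × Int)) :
    IInv g rect par ((g.length : Int), 0)
      (pvInfo g (g.length : Int) ((g.headD []).length : Int) rect par) := by
  rw [pvInfo_eq]
  refine foldl_pyRange_inv 0 (g.length : Int) (by positivity) _
    (fun k info => IInv g rect par (k, 0) info) _ ?_ ?_
  · intro ρ
    refine ⟨?_, ?_⟩
    · intro _ z hz hreg
      rw [kltb_iff] at hreg
      have := hz.1
      have := hz.2.2.1
      simp only at hreg
      omega
    · intro bb hbb
      rw [PySem.Dict.get?_empty] at hbb
      cases hbb
  · intro r info hr hrr hinv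
    have hcols : (0 : Int) ≤ ((g.headD []).length : Int) := by positivity
    have hrow := foldl_pyRange_inv 0 ((g.headD []).length : Int) hcols
      (infoStep g rect r par) (fun k info => IInv g rect par (r, k) info) info hinv
      (fun c s hc hcc hi => info_step g rect par r c hr hrr hc hcc hi)
    intro ρ
    have hconv : ∀ z : Int × Int, Rct g rect z →
        (kltb z (r + 1, 0) = true ↔ kltb z (r, ((g.headD []).length : Int)) = true) := by
      intro z hz
      rw [kltb_iff, kltb_iff]
      have := hz.2.2.1
      have := hz.2.2.2.1
      simp only at *
      omega
    refine ⟨?_, ?_⟩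
    · intro hnone z hz hreg
      exact (hrow ρ).1 hnone z hz ((hconv z hz).mp hreg)
    · intro bb hbb
      obtain ⟨⟨w1, w2, w3, w4⟩, hbound⟩ := (hrow ρ).2 bb hbb
      refine ⟨⟨?_, ?_, ?_, ?_⟩, ?_⟩
      · obtain ⟨z, a1, a2, a3, a4⟩ := w1
        exact ⟨z, a1, (hconv z a1).mpr a2, a3, a4⟩
      · obtain ⟨z, a1, a2, a3, a4⟩ := w2
        exact ⟨z, a1, (hconv z a1).mpr a2, a3, a4⟩
      · obtain ⟨z, a1, a2, a3, a4⟩ := w3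
        exact ⟨z, a1, (hconv z a1).mpr a2, a3, a4⟩
      · obtain ⟨z, a1, a2, a3, a4⟩ := w4
        exact ⟨z, a1, (hconv z a1).mpr a2, a3, a4⟩
      · intro z hz hreg hzρ
        exact hbound z hz ((hconv z hz).mp hreg) hzρ

-- bbox of the component of x, as computed by B
theorem pvInfo_getD (g : List (List Int)) (rect : Int)
    (par : PySem.Dict (Int × Int) (Int × Int)) (x : Int × Int) (hx : Rct g rect x) :
    ((∃ z, Rct g rect z ∧ pvFind par z = pvFind par x ∧
        z.1 = ((pvInfo g (g.length : Int) ((g.headD []).length : Int) rect par).getD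
          (pvFind par x) (0, 0, 0, 0)).1) ∧
     (∃ z, Rct g rect z ∧ pvFind par z = pvFind par x ∧
        z.1 = ((pvInfo g (g.length : Int) ((g.headD []).length : Int) rect par).getD
          (pvFind par x) (0, 0, 0, 0)).2.1) ∧
     (∃ z, Rct g rect z ∧ pvFind par z = pvFind par x ∧
        z.2 = ((pvInfo g (g.length : Int) ((g.headD []).length : Int) rect par).getD
          (pvFind par x) (0, 0, 0, 0)).2.2.1) ∧
     (∃ z, Rct g rect z ∧ pvFind par z = pvFind par x ∧
        z.2 = ((pvInfo g (g.length : Int) ((g.headD []).length : Int) rect par).getD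
          (pvFind par x) (0, 0, 0, 0)).2.2.2)) ∧
    (∀ z, Rct g rect z → pvFind par z = pvFind par x →
      ((pvInfo g (g.length : Int) ((g.headD []).length : Int) rect par).getD
          (pvFind par x) (0, 0, 0, 0)).1 ≤ z.1 ∧
      z.1 ≤ ((pvInfo g (g.length : Int) ((g.headD []).length : Int) rect par).getD
          (pvFind par x) (0, 0, 0, 0)).2.1 ∧
      ((pvInfo g (g.length : Int) ((g.headD []).length : Int) rect par).getD
          (pvFind par x) (0, 0, 0, 0)).2.2.1 ≤ z.2 ∧
      z.2 ≤ ((pvInfo g (g.length : Int) ((g.headD []).length : Int) rect par).getD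
          (pvFind par x) (0, 0, 0, 0)).2.2.2) := by
  have hspec := pvInfo_spec g rect par (pvFind par x)
  have hregall : ∀ z : Int × Int, Rct g rect z →
      kltb z ((g.length : Int), 0) = true := fun z hz => rct_region g rect hz
  rcases hget : (pvInfo g (g.length : Int) ((g.headD []).length : Int) rect par).get?
      (pvFind par x) with _ | bb
  · exact absurd rfl (hspec.1 hget x hx (hregall x hx))
  · have hgetD : (pvInfo g (g.length : Int) ((g.headD []).length : Int) rect par).getD
        (pvFind par x) (0, 0, 0, 0) = bb := by
      rw [PySem.Dict.getD_eq_get?_getD, hget]; rfl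
    rw [hgetD]
    obtain ⟨⟨w1, w2, w3, w4⟩, hbound⟩ := (hspec.2) bb hget
    refine ⟨⟨?_, ?_, ?_, ?_⟩, ?_⟩
    · obtain ⟨z, a1, _, a3, a4⟩ := w1
      exact ⟨z, a1, a3, a4⟩
    · obtain ⟨z, a1, _, a3, a4⟩ := w2
      exact ⟨z, a1, a3, a4⟩
    · obtain ⟨z, a1, _, a3, a4⟩ := w3
      exact ⟨z, a1, a3, a4⟩
    · obtain ⟨z, a1, _, a3, a4⟩ := w4
      exact ⟨z, a1, a3, a4⟩
    · intro z hz hzρ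
      exact hbound z hz (hregall z hz) hzρ

-- Part 7: outputs ------------------------------------------------------------------------

def parOf (g : List (List Int)) (rect : Int) : PySem.Dict (Int × Int) (Int × Int) :=
  pvUnions g (g.length : Int) ((g.headD []).length : Int) rect

def infoOf (g : List (List Int)) (rect : Int) :
    PySem.Dict (Int × Int) (Int × Int × Int × Int) :=
  pvInfo g (g.length : Int) ((g.headD []).length : Int) rect (parOf g rect)

-- the cell-paint condition of B (bb = bounding box of the component of (r, c))
def BPaint (g : List (List Int)) (rect : Int) (r c : Int) : Prop :=
  pvAt g r c = rect ∧
    ((infoOf g rect).getD (pvFind (parOf g rect) (r, c)) (0, 0, 0, 0)).2.1 -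
      ((infoOf g rect).getD (pvFind (parOf g rect) (r, c)) (0, 0, 0, 0)).1 ≥ 2 ∧
    ((infoOf g rect).getD (pvFind (parOf g rect) (r, c)) (0, 0, 0, 0)).2.2.2 -
      ((infoOf g rect).getD (pvFind (parOf g rect) (r, c)) (0, 0, 0, 0)).2.2.1 ≥ 2 ∧
    (r = PySem.Int.floordiv
        (((infoOf g rect).getD (pvFind (parOf g rect) (r, c)) (0, 0, 0, 0)).1 +
         ((infoOf g rect).getD (pvFind (parOf g rect) (r, c)) (0, 0, 0, 0)).2.1) 2 ∨
     c = PySem.Int.floordiv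
        (((infoOf g rect).getD (pvFind (parOf g rect) (r, c)) (0, 0, 0, 0)).2.2.1 +
         ((infoOf g rect).getD (pvFind (parOf g rect) (r, c)) (0, 0, 0, 0)).2.2.2) 2)

-- B's row-building loop, characterized cell-wise
def bRowStep (g : List (List Int)) (rect r : Int)
    (par : PySem.Dict (Int × Int) (Int × Int))
    (info : PySem.Dict (Int × Int) (Int × Int × Int × Int))
    (row : List Int) (c : Int) : List Int :=
  if pvAt g r c = rect then
    if (info.getD (pvFind par (r, c)) (0, 0, 0, 0)).2.1 -
          (info.getD (pvFind par (r, c)) (0, 0, 0, 0)).1 ≥ 2 ∧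
        (info.getD (pvFind par (r, c)) (0, 0, 0, 0)).2.2.2 -
          (info.getD (pvFind par (r, c)) (0, 0, 0, 0)).2.2.1 ≥ 2 ∧
        (r = PySem.Int.floordiv ((info.getD (pvFind par (r, c)) (0, 0, 0, 0)).1 +
            (info.getD (pvFind par (r, c)) (0, 0, 0, 0)).2.1) 2 ∨
         c = PySem.Int.floordiv ((info.getD (pvFind par (r, c)) (0, 0, 0, 0)).2.2.1 +
            (info.getD (pvFind par (r, c)) (0, 0, 0, 0)).2.2.2) 2) then
      row.set c.toNat 8
    else row
  else row

theorem transform_alt_some (g : List (List Int)) (rect : Int)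
    (hne : ¬ (g = [] ∨ g.headD [] = []))
    (hsel : (pvRectSel (pvCounts g (g.length : Int) ((g.headD []).length : Int)).items
      (pvAt g 0 0)).1 = some rect) :
    transform_alt g = (PySem.List.pyRange 0 (g.length : Int) 1).foldl (fun out r =>
      out ++ [(PySem.List.pyRange 0 ((g.headD []).length : Int) 1).foldl
        (bRowStep g rect r (parOf g rect) (infoOf g rect))
        (PySem.List.pyGetD g r [])]) [] := by
  unfold transform_alt
  rw [if_neg hne]
  simp only [hsel]
  rfl

theorem bRow_char (g : List (List Int)) (rect r : Int) (hr : 0 ≤ r)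
    (hrr : r < (g.length : Int))
    (hPre : ∀ row ∈ g, (g.headD []).length ≤ row.length) :
    ((PySem.List.pyRange 0 ((g.headD []).length : Int) 1).foldl
        (bRowStep g rect r (parOf g rect) (infoOf g rect))
        (PySem.List.pyGetD g r [])).length = (g.getD r.toNat []).length ∧
    ∀ j : Nat,
      (((j : Int) < ((g.headD []).length : Int) ∧ BPaint g rect r (j : Int)) →
        ((PySem.List.pyRange 0 ((g.headD []).length : Int) 1).foldl
          (bRowStep g rect r (parOf g rect) (infoOf g rect))
          (PySem.List.pyGetD g r [])).getD j 0 = 8) ∧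
      (¬ ((j : Int) < ((g.headD []).length : Int) ∧ BPaint g rect r (j : Int)) →
        ((PySem.List.pyRange 0 ((g.headD []).length : Int) 1).foldl
          (bRowStep g rect r (parOf g rect) (infoOf g rect))
          (PySem.List.pyGetD g r [])).getD j 0 = (g.getD r.toNat []).getD j 0) := by
  have horig : PySem.List.pyGetD g r [] = g.getD r.toNat [] := pyGetD_toNat g r [] hr
  have hglen : ((g.headD []).length : Int) ≤ ((g.getD r.toNat []).length : Int) := by
    have hmem : g.getD r.toNat [] ∈ g := by
      rw [List.getD_eq_getElem?_getD, List.getElem?_eq_getElem (by omega)]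
      exact List.getElem_mem _
    exact_mod_cast hPre _ hmem
  have main := foldl_pyRange_inv 0 ((g.headD []).length : Int) (by positivity)
    (bRowStep g rect r (parOf g rect) (infoOf g rect))
    (fun k row => row.length = (g.getD r.toNat []).length ∧
      ∀ j : Nat, (((j : Int) < k ∧ BPaint g rect r (j : Int)) → row.getD j 0 = 8) ∧
        (¬ ((j : Int) < k ∧ BPaint g rect r (j : Int)) →
          row.getD j 0 = (g.getD r.toNat []).getD j 0))
    (PySem.List.pyGetD g r [])
    (by
      rw [horig]
      refine ⟨rfl, ?_⟩
      intro j
      refine ⟨?_, fun _ => rfl⟩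
      rintro ⟨h1, _⟩
      omega)
    ?_
  · exact main
  · intro k row hk hkk hinv
    unfold bRowStep
    have hnotBP : ¬ pvAt g r k = rect ∨
        (pvAt g r k = rect ∧ ¬ BPaint g rect r k) ∨ BPaint g rect r k := by
      by_cases h1 : pvAt g r k = rect
      · by_cases h2 : BPaint g rect r k
        · exact Or.inr (Or.inr h2)
        · exact Or.inr (Or.inl ⟨h1, h2⟩)
      · exact Or.inl h1
    by_cases hrect : pvAt g r k = rect
    · rw [if_pos hrect]
      by_cases hbig : ((infoOf g rect).getD (pvFind (parOf g rect) (r, k)) (0, 0, 0, 0)).2.1 -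
            ((infoOf g rect).getD (pvFind (parOf g rect) (r, k)) (0, 0, 0, 0)).1 ≥ 2 ∧
          ((infoOf g rect).getD (pvFind (parOf g rect) (r, k)) (0, 0, 0, 0)).2.2.2 -
            ((infoOf g rect).getD (pvFind (parOf g rect) (r, k)) (0, 0, 0, 0)).2.2.1 ≥ 2 ∧
          (r = PySem.Int.floordiv
              (((infoOf g rect).getD (pvFind (parOf g rect) (r, k)) (0, 0, 0, 0)).1 +
               ((infoOf g rect).getD (pvFind (parOf g rect) (r, k)) (0, 0, 0, 0)).2.1) 2 ∨
           k = PySem.Int.floordiv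
              (((infoOf g rect).getD (pvFind (parOf g rect) (r, k)) (0, 0, 0, 0)).2.2.1 +
               ((infoOf g rect).getD (pvFind (parOf g rect) (r, k)) (0, 0, 0, 0)).2.2.2) 2)
      · rw [if_pos hbig]
        have hBP : BPaint g rect r k := ⟨hrect, hbig.1, hbig.2.1, hbig.2.2⟩
        refine ⟨by rw [List.length_set]; exact hinv.1, ?_⟩
        intro j
        rw [getD_set_list]
        by_cases hj : k.toNat = j
        · rw [if_pos ⟨hj, by rw [hinv.1]; omega⟩]
          refine ⟨fun _ => rfl, fun hcon => ?_⟩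
          exfalso
          refine hcon ⟨by omega, ?_⟩
          rw [show ((j : Int)) = k by omega]
          exact hBP
        · rw [if_neg (fun hh => hj hh.1)]
          constructor
          · rintro ⟨h1, h2⟩
            exact (hinv.2 j).1 ⟨by omega, h2⟩
          · intro hcon
            refine (hinv.2 j).2 (fun hh => hcon ⟨by omega, hh.2⟩)
      · rw [if_neg hbig]
        have hnBP : ¬ BPaint g rect r k := by
          intro hh
          exact hbig ⟨hh.2.1, hh.2.2.1, hh.2.2.2⟩
        refine ⟨hinv.1, ?_⟩
        intro j
        constructor
        · rintro ⟨h1, h2⟩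
          refine (hinv.2 j).1 ⟨?_, h2⟩
          rcases Int.lt_or_lt_of_ne (fun hh : (j : Int) = k => hnBP (hh ▸ h2)) with hlt | hlt
          · omega
          · omega
        · intro hcon
          exact (hinv.2 j).2 (fun hh => hcon ⟨by omega, hh.2⟩)
    · rw [if_neg hrect]
      have hnBP : ¬ BPaint g rect r k := fun hh => hrect hh.1
      refine ⟨hinv.1, ?_⟩
      intro j
      constructor
      · rintro ⟨h1, h2⟩
        refine (hinv.2 j).1 ⟨?_, h2⟩
        rcases Int.lt_or_lt_of_ne (fun hh : (j : Int) = k => hnBP (hh ▸ h2)) with hlt | hlt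
        · omega
        · omega
      · intro hcon
        exact (hinv.2 j).2 (fun hh => hcon ⟨by omega, hh.2⟩)

-- generic conditional-write fold over the output grid
theorem foldl_writes (g : List (List Int)) (L : List Int) (pos1 pos2 : Int → Int)
    (cond : Int → Prop) [DecidablePred cond] :
    ∀ (out : List (List Int)),
    out.length = g.length →
    (∀ i : Nat, (out.getD i []).length = (g.getD i []).length) →
    (∀ t ∈ L, cond t → 0 ≤ pos1 t ∧ pos1 t < (g.length : Int) ∧
      0 ≤ pos2 t ∧ pos2 t < ((g.getD (pos1 t).toNat []).length : Int)) →
    (L.foldl (fun o t => if cond t then pvSet2 o (pos1 t) (pos2 t) 8 else o) out).length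
        = g.length ∧
    (∀ i : Nat,
      ((L.foldl (fun o t => if cond t then pvSet2 o (pos1 t) (pos2 t) 8 else o) out).getD i []).length
        = (g.getD i []).length) ∧
    ∀ i j : Nat,
      ((∃ t ∈ L, cond t ∧ (pos1 t).toNat = i ∧ (pos2 t).toNat = j) →
        pvCell (L.foldl (fun o t => if cond t then pvSet2 o (pos1 t) (pos2 t) 8 else o) out) i j = 8) ∧
      ((¬ ∃ t ∈ L, cond t ∧ (pos1 t).toNat = i ∧ (pos2 t).toNat = j) →
        pvCell (L.foldl (fun o t => if cond t then pvSet2 o (pos1 t) (pos2 t) 8 else o) out) i j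
          = pvCell out i j) := by
  induction L with
  | nil =>
    intro out h1 h2 _
    refine ⟨h1, h2, ?_⟩
    intro i j
    refine ⟨?_, fun _ => rfl⟩
    rintro ⟨t, ht, _⟩
    cases ht
  | cons t L ihL =>
    intro out h1 h2 hpos
    rw [List.foldl_cons]
    by_cases hc : cond t
    · have hb := hpos t (by simp) hc
      have hrowlen : (pos2 t) < ((out.getD (pos1 t).toNat []).length : Int) := by
        rw [h2]; exact hb.2.2.2
      have hout1len : (pvSet2 out (pos1 t) (pos2 t) 8).length = g.length := by
        rw [length_pvSet2]; exact h1
      have hout1row : ∀ i : Nat,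
          ((pvSet2 out (pos1 t) (pos2 t) 8).getD i []).length = (g.getD i []).length := by
        intro i
        rw [getD_pvSet2_row]; exact h2 i
      rw [if_pos hc]
      obtain ⟨k1, k2, k3⟩ := ihL (pvSet2 out (pos1 t) (pos2 t) 8) hout1len hout1row
        (fun s hs hcs => hpos s (by simp [hs]) hcs)
      refine ⟨k1, k2, ?_⟩
      intro i j
      have hcellset := cell_pvSet2 out (pos1 t) (pos2 t) 8 i j hb.1 hb.2.2.1
        (by omega) hrowlen
      constructor
      · rintro ⟨s, hs, hcs, hp1, hp2⟩
        rcases List.mem_cons.mp hs with rfl | hs2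
        · by_cases hrest : ∃ s ∈ L, cond s ∧ (pos1 s).toNat = i ∧ (pos2 s).toNat = j
          · exact (k3 i j).1 hrest
          · rw [(k3 i j).2 hrest, hcellset, if_pos ⟨hp1, hp2⟩]
        · exact (k3 i j).1 ⟨s, hs2, hcs, hp1, hp2⟩
      · intro hnone
        have hnrest : ¬ ∃ s ∈ L, cond s ∧ (pos1 s).toNat = i ∧ (pos2 s).toNat = j := by
          rintro ⟨s, hs, hcs, hp1, hp2⟩
          exact hnone ⟨s, by simp [hs], hcs, hp1, hp2⟩
        rw [(k3 i j).2 hnrest, hcellset, if_neg (fun hh =>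
          hnone ⟨t, by simp, hc, hh.1, hh.2⟩)]
    · rw [if_neg hc]
      obtain ⟨k1, k2, k3⟩ := ihL out h1 h2 (fun s hs hcs => hpos s (by simp [hs]) hcs)
      refine ⟨k1, k2, ?_⟩
      intro i j
      constructor
      · rintro ⟨s, hs, hcs, hp1, hp2⟩
        rcases List.mem_cons.mp hs with rfl | hs2
        · exact absurd hcs hc
        · exact (k3 i j).1 ⟨s, hs2, hcs, hp1, hp2⟩
      · intro hnone
        exact (k3 i j).2 (fun ⟨s, hs, hcs, hp1, hp2⟩ =>
          hnone ⟨s, by simp [hs], hcs, hp1, hp2⟩)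

-- A's bounding-box values for a component
def aMinr (comp : List (Int × Int)) : Int :=
  (PySem.List.min? (comp.map (·.1)) (fun x => x)).getD 0
def aMaxr (comp : List (Int × Int)) : Int :=
  (PySem.List.max? (comp.map (·.1)) (fun x => x)).getD 0
def aMinc (comp : List (Int × Int)) : Int :=
  (PySem.List.min? (comp.map (·.2)) (fun x => x)).getD 0
def aMaxc (comp : List (Int × Int)) : Int :=
  (PySem.List.max? (comp.map (·.2)) (fun x => x)).getD 0

theorem aMinr_spec (comp : List (Int × Int)) (hne : comp ≠ []) :
    (∃ z ∈ comp, z.1 = aMinr comp) ∧ ∀ z ∈ comp, aMinr comp ≤ z.1 := by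
  unfold aMinr
  rcases hm : PySem.List.min? (comp.map (·.1)) (fun x => x) with _ | m
  · rw [PySem.List.min?_eq_none_iff] at hm
    simp at hm
    exact absurd hm hne
  · rw [hm]
    simp only [Option.getD_some]
    have h1 := PySem.List.min?_mem hm
    have h2 := PySem.List.min?_isMin hm
    simp only [List.mem_map] at h1
    obtain ⟨z, hz, hz2⟩ := h1
    refine ⟨⟨z, hz, hz2⟩, ?_⟩
    intro w hw
    simpa using h2 w.1 (List.mem_map.mpr ⟨w, hw, rfl⟩)

theorem aMaxr_spec (comp : List (Int × Int)) (hne : comp ≠ []) :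
    (∃ z ∈ comp, z.1 = aMaxr comp) ∧ ∀ z ∈ comp, z.1 ≤ aMaxr comp := by
  unfold aMaxr
  rcases hm : PySem.List.max? (comp.map (·.1)) (fun x => x) with _ | m
  · rw [PySem.List.max?_eq_none_iff] at hm
    simp at hm
    exact absurd hm hne
  · rw [hm]
    simp only [Option.getD_some]
    have h1 := PySem.List.max?_mem hm
    have h2 := PySem.List.max?_isMax hm
    simp only [List.mem_map] at h1
    obtain ⟨z, hz, hz2⟩ := h1
    refine ⟨⟨z, hz, hz2⟩, ?_⟩
    intro w hw
    simpa using h2 w.1 (List.mem_map.mpr ⟨w, hw, rfl⟩)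

theorem aMinc_spec (comp : List (Int × Int)) (hne : comp ≠ []) :
    (∃ z ∈ comp, z.2 = aMinc comp) ∧ ∀ z ∈ comp, aMinc comp ≤ z.2 := by
  unfold aMinc
  rcases hm : PySem.List.min? (comp.map (·.2)) (fun x => x) with _ | m
  · rw [PySem.List.min?_eq_none_iff] at hm
    simp at hm
    exact absurd hm hne
  · rw [hm]
    simp only [Option.getD_some]
    have h1 := PySem.List.min?_mem hm
    have h2 := PySem.List.min?_isMin hm
    simp only [List.mem_map] at h1
    obtain ⟨z, hz, hz2⟩ := h1
    refine ⟨⟨z, hz, hz2⟩, ?_⟩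
    intro w hw
    simpa using h2 w.2 (List.mem_map.mpr ⟨w, hw, rfl⟩)

theorem aMaxc_spec (comp : List (Int × Int)) (hne : comp ≠ []) :
    (∃ z ∈ comp, z.2 = aMaxc comp) ∧ ∀ z ∈ comp, z.2 ≤ aMaxc comp := by
  unfold aMaxc
  rcases hm : PySem.List.max? (comp.map (·.2)) (fun x => x) with _ | m
  · rw [PySem.List.max?_eq_none_iff] at hm
    simp at hm
    exact absurd hm hne
  · rw [hm]
    simp only [Option.getD_some]
    have h1 := PySem.List.max?_mem hm
    have h2 := PySem.List.max?_isMax hm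
    simp only [List.mem_map] at h1
    obtain ⟨z, hz, hz2⟩ := h1
    refine ⟨⟨z, hz, hz2⟩, ?_⟩
    intro w hw
    simpa using h2 w.2 (List.mem_map.mpr ⟨w, hw, rfl⟩)

-- the set of cells A's cross pass paints inside component comp
def APaint (comp : List (Int × Int)) (z : Int × Int) : Prop :=
  z ∈ comp ∧ aMaxr comp - aMinr comp ≥ 2 ∧ aMaxc comp - aMinc comp ≥ 2 ∧
    (z.1 = PySem.Int.floordiv (aMinr comp + aMaxr comp) 2 ∨
     z.2 = PySem.Int.floordiv (aMinc comp + aMaxc comp) 2)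

theorem pvDraw_char (g : List (List Int)) (rect : Int) (comp : List (Int × Int))
    (sd : Int × Int) (hsd : sd ∈ comp)
    (hcls : ∀ z, z ∈ comp ↔ Rct g rect z ∧ Conn g rect sd z)
    (hPre : ∀ row ∈ g, (g.headD []).length ≤ row.length) :
    ∀ out, out.length = g.length →
    (∀ i : Nat, (out.getD i []).length = (g.getD i []).length) →
    (pvDraw g rect out comp).length = g.length ∧
    (∀ i : Nat, ((pvDraw g rect out comp).getD i []).length = (g.getD i []).length) ∧
    ∀ i j : Nat,
      ((∃ z, APaint comp z ∧ z.1.toNat = i ∧ z.2.toNat = j) →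
        pvCell (pvDraw g rect out comp) i j = 8) ∧
      ((¬ ∃ z, APaint comp z ∧ z.1.toNat = i ∧ z.2.toNat = j) →
        pvCell (pvDraw g rect out comp) i j = pvCell out i j) := by
  intro out hlen hrow
  have hne : comp ≠ [] := fun hh => by rw [hh] at hsd; cases hsd
  obtain ⟨⟨zr, hzr, hzr2⟩, hminr⟩ := aMinr_spec comp hne
  obtain ⟨⟨zR, hzR, hzR2⟩, hmaxr⟩ := aMaxr_spec comp hne
  obtain ⟨⟨zc, hzc, hzc2⟩, hminc⟩ := aMinc_spec comp hne
  obtain ⟨⟨zC, hzC, hzC2⟩, hmaxc⟩ := aMaxc_spec comp hne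
  have hrct : ∀ z ∈ comp, Rct g rect z := fun z hz => ((hcls z).mp hz).1
  have hDraw : pvDraw g rect out comp =
      (if aMaxr comp - aMinr comp ≥ 2 ∧ aMaxc comp - aMinc comp ≥ 2 then
        (PySem.List.pyRange (aMinr comp) (aMaxr comp + 1) 1).foldl (fun o rrr =>
          if (rrr, PySem.Int.floordiv (aMinc comp + aMaxc comp) 2) ∈
                (PySem.Set.ofList comp : PySem.Set (Int × Int)) ∧
              pvAt g rrr (PySem.Int.floordiv (aMinc comp + aMaxc comp) 2) = rect then
            pvSet2 o rrr (PySem.Int.floordiv (aMinc comp + aMaxc comp) 2) 8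
          else o)
        ((PySem.List.pyRange (aMinc comp) (aMaxc comp + 1) 1).foldl (fun o ccx =>
          if (PySem.Int.floordiv (aMinr comp + aMaxr comp) 2, ccx) ∈
                (PySem.Set.ofList comp : PySem.Set (Int × Int)) ∧
              pvAt g (PySem.Int.floordiv (aMinr comp + aMaxr comp) 2) ccx = rect then
            pvSet2 o (PySem.Int.floordiv (aMinr comp + aMaxr comp) 2) ccx 8
          else o) out)
      else out) := rfl
  by_cases hbig : aMaxr comp - aMinr comp ≥ 2 ∧ aMaxc comp - aMinc comp ≥ 2
  case neg =>
    rw [hDraw, if_neg hbig]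
    refine ⟨hlen, hrow, ?_⟩
    intro i j
    refine ⟨?_, fun _ => rfl⟩
    rintro ⟨z, ⟨_, b1, b2, _⟩, _⟩
    exact absurd ⟨b1, b2⟩ hbig
  case pos =>
    have hminmaxr : aMinr comp ≤ aMaxr comp := by omega
    have hminmaxc : aMinc comp ≤ aMaxc comp := by omega
    obtain ⟨hrc1, hrc2⟩ := PySem.Int.floordiv_two_mid_bounds hminmaxr
    obtain ⟨hcc1, hcc2⟩ := PySem.Int.floordiv_two_mid_bounds hminmaxc
    have hrownn : ∀ a : Int, 0 ≤ a → a < (g.length : Int) →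
        ((g.headD []).length : Int) ≤ ((g.getD a.toNat []).length : Int) := by
      intro a ha1 ha2
      have hmem : g.getD a.toNat [] ∈ g := by
        rw [List.getD_eq_getElem?_getD, List.getElem?_eq_getElem (by omega)]
        exact List.getElem_mem _
      exact_mod_cast hPre _ hmem
    -- bounds for the two write loops
    have hposr : ∀ t ∈ PySem.List.pyRange (aMinc comp) (aMaxc comp + 1) 1,
        ((PySem.Int.floordiv (aMinr comp + aMaxr comp) 2, t) ∈
            (PySem.Set.ofList comp : PySem.Set (Int × Int)) ∧
          pvAt g (PySem.Int.floordiv (aMinr comp + aMaxr comp) 2) t = rect) →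
        0 ≤ PySem.Int.floordiv (aMinr comp + aMaxr comp) 2 ∧
        PySem.Int.floordiv (aMinr comp + aMaxr comp) 2 < (g.length : Int) ∧
        0 ≤ t ∧ t < ((g.getD (PySem.Int.floordiv (aMinr comp + aMaxr comp) 2).toNat []).length : Int) := by
      intro t _ hcond
      have hz := hrct _ ((PySem.Set.mem_ofList _ _).mp hcond.1)
      obtain ⟨a1, a2, a3, a4, _⟩ := hz
      simp only at a1 a2 a3 a4
      exact ⟨a1, a2, a3, lt_of_lt_of_le a4 (hrownn _ a1 a2)⟩
    have hposc : ∀ t ∈ PySem.List.pyRange (aMinr comp) (aMaxr comp + 1) 1,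
        ((t, PySem.Int.floordiv (aMinc comp + aMaxc comp) 2) ∈
            (PySem.Set.ofList comp : PySem.Set (Int × Int)) ∧
          pvAt g t (PySem.Int.floordiv (aMinc comp + aMaxc comp) 2) = rect) →
        0 ≤ t ∧ t < (g.length : Int) ∧
        0 ≤ PySem.Int.floordiv (aMinc comp + aMaxc comp) 2 ∧
        PySem.Int.floordiv (aMinc comp + aMaxc comp) 2 < ((g.getD t.toNat []).length : Int) := by
      intro t _ hcond
      have hz := hrct _ ((PySem.Set.mem_ofList _ _).mp hcond.1)
      obtain ⟨a1, a2, a3, a4, _⟩ := hz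
      simp only at a1 a2 a3 a4
      exact ⟨a1, a2, a3, lt_of_lt_of_le a4 (hrownn _ a1 a2)⟩
    obtain ⟨r1, r2, r3⟩ := foldl_writes g (PySem.List.pyRange (aMinc comp) (aMaxc comp + 1) 1)
      (fun _ => PySem.Int.floordiv (aMinr comp + aMaxr comp) 2) (fun t => t)
      (fun t => (PySem.Int.floordiv (aMinr comp + aMaxr comp) 2, t) ∈
          (PySem.Set.ofList comp : PySem.Set (Int × Int)) ∧
        pvAt g (PySem.Int.floordiv (aMinr comp + aMaxr comp) 2) t = rect)
      out hlen hrow hposr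
    obtain ⟨s1, s2, s3⟩ := foldl_writes g (PySem.List.pyRange (aMinr comp) (aMaxr comp + 1) 1)
      (fun t => t) (fun _ => PySem.Int.floordiv (aMinc comp + aMaxc comp) 2)
      (fun t => (t, PySem.Int.floordiv (aMinc comp + aMaxc comp) 2) ∈
          (PySem.Set.ofList comp : PySem.Set (Int × Int)) ∧
        pvAt g t (PySem.Int.floordiv (aMinc comp + aMaxc comp) 2) = rect)
      _ r1 r2 hposc
    rw [hDraw, if_pos hbig]
    refine ⟨s1, s2, ?_⟩
    intro i j
    constructor
    · rintro ⟨z, ⟨hzmem, _, _, hcen⟩, hci, hcj⟩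
      have hzrct := hrct z hzmem
      obtain ⟨a1, a2, a3, a4, a5⟩ := hzrct
      rcases hcen with hcen | hcen
      · -- centre row: painted by the first loop, possibly overwritten by the second (also 8)
        by_cases h2 : ∃ t ∈ PySem.List.pyRange (aMinr comp) (aMaxr comp + 1) 1,
            ((t, PySem.Int.floordiv (aMinc comp + aMaxc comp) 2) ∈
                (PySem.Set.ofList comp : PySem.Set (Int × Int)) ∧
              pvAt g t (PySem.Int.floordiv (aMinc comp + aMaxc comp) 2) = rect) ∧
            t.toNat = i ∧ (PySem.Int.floordiv (aMinc comp + aMaxc comp) 2).toNat = j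
        · exact (s3 i j).1 h2
        · rw [(s3 i j).2 h2]
          refine (r3 i j).1 ⟨z.2, ?_, ⟨?_, ?_⟩, ?_, hcj⟩
          · rw [PySem.List.mem_pyRange_one]
            exact ⟨hminc z hzmem, by have := hmaxc z hzmem; omega⟩
          · rw [PySem.Set.mem_ofList, show (PySem.Int.floordiv (aMinr comp + aMaxr comp) 2, z.2) = z
              from by rw [Prod.ext_iff]; exact ⟨hcen.symm, rfl⟩]
            exact hzmem
          · rw [← hcen]; exact a5
          · rw [← hcen]; exact hci
      · -- centre column: painted by the second loop
        refine (s3 i j).1 ⟨z.1, ?_, ⟨?_, ?_⟩, hci, ?_⟩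
        · rw [PySem.List.mem_pyRange_one]
          exact ⟨hminr z hzmem, by have := hmaxr z hzmem; omega⟩
        · rw [PySem.Set.mem_ofList, show (z.1, PySem.Int.floordiv (aMinc comp + aMaxc comp) 2) = z
            from by rw [Prod.ext_iff]; exact ⟨rfl, hcen.symm⟩]
          exact hzmem
        · rw [← hcen]; exact a5
        · rw [← hcen]; exact hcj
    · intro hnone
      have hn2 : ¬ ∃ t ∈ PySem.List.pyRange (aMinr comp) (aMaxr comp + 1) 1,
          ((t, PySem.Int.floordiv (aMinc comp + aMaxc comp) 2) ∈
              (PySem.Set.ofList comp : PySem.Set (Int × Int)) ∧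
            pvAt g t (PySem.Int.floordiv (aMinc comp + aMaxc comp) 2) = rect) ∧
          t.toNat = i ∧ (PySem.Int.floordiv (aMinc comp + aMaxc comp) 2).toNat = j := by
        rintro ⟨t, _, ⟨hmem, _⟩, hti, htj⟩
        refine hnone ⟨(t, PySem.Int.floordiv (aMinc comp + aMaxc comp) 2),
          ⟨(PySem.Set.mem_ofList _ _).mp hmem, hbig.1, hbig.2, Or.inr rfl⟩, hti, htj⟩
      have hn1 : ¬ ∃ t ∈ PySem.List.pyRange (aMinc comp) (aMaxc comp + 1) 1,
          ((PySem.Int.floordiv (aMinr comp + aMaxr comp) 2, t) ∈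
              (PySem.Set.ofList comp : PySem.Set (Int × Int)) ∧
            pvAt g (PySem.Int.floordiv (aMinr comp + aMaxr comp) 2) t = rect) ∧
          (PySem.Int.floordiv (aMinr comp + aMaxr comp) 2).toNat = i ∧ t.toNat = j := by
        rintro ⟨t, _, ⟨hmem, _⟩, hti, htj⟩
        refine hnone ⟨(PySem.Int.floordiv (aMinr comp + aMaxr comp) 2, t),
          ⟨(PySem.Set.mem_ofList _ _).mp hmem, hbig.1, hbig.2, Or.inl rfl⟩, hti, htj⟩
      rw [(s3 i j).2 hn2, (r3 i j).2 hn1]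

theorem parOf_root_iff (g : List (List Int)) (rect : Int) (x y : Int × Int)
    (hx : Rct g rect x) (hy : Rct g rect y) :
    (pvFind (parOf g rect) x = pvFind (parOf g rect) y) ↔ Conn g rect x y := by
  unfold parOf
  exact unions_root_iff g rect x y hx hy

theorem bbox_eq (g : List (List Int)) (rect : Int) (comp : List (Int × Int))
    (sd : Int × Int) (hsd : sd ∈ comp)
    (hcls : ∀ z, z ∈ comp ↔ Rct g rect z ∧ Conn g rect sd z)
    (x : Int × Int) (hx : x ∈ comp) :
    aMinr comp = ((infoOf g rect).getD (pvFind (parOf g rect) x) (0, 0, 0, 0)).1 ∧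
    aMaxr comp = ((infoOf g rect).getD (pvFind (parOf g rect) x) (0, 0, 0, 0)).2.1 ∧
    aMinc comp = ((infoOf g rect).getD (pvFind (parOf g rect) x) (0, 0, 0, 0)).2.2.1 ∧
    aMaxc comp = ((infoOf g rect).getD (pvFind (parOf g rect) x) (0, 0, 0, 0)).2.2.2 := by
  have hxr : Rct g rect x := ((hcls x).mp hx).1
  have hxc : Conn g rect sd x := ((hcls x).mp hx).2
  have hne : comp ≠ [] := fun hh => by rw [hh] at hsd; cases hsd
  have hmem : ∀ z, z ∈ comp ↔
      (Rct g rect z ∧ pvFind (parOf g rect) z = pvFind (parOf g rect) x) := by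
    intro z
    rw [hcls z]
    constructor
    · rintro ⟨h1, h2⟩
      refine ⟨h1, ?_⟩
      rw [parOf_root_iff g rect z x h1 hxr]
      exact Relation.ReflTransGen.trans (conn_symm g rect h2) hxc
    · rintro ⟨h1, h2⟩
      refine ⟨h1, ?_⟩
      rw [parOf_root_iff g rect z x h1 hxr] at h2
      exact Relation.ReflTransGen.trans hxc (conn_symm g rect h2)
  obtain ⟨⟨w1, w2, w3, w4⟩, hbound⟩ := pvInfo_getD g rect (parOf g rect) x hxr
  obtain ⟨⟨zr, hzr, hzr2⟩, hminr⟩ := aMinr_spec comp hne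
  obtain ⟨⟨zR, hzR, hzR2⟩, hmaxr⟩ := aMaxr_spec comp hne
  obtain ⟨⟨zc, hzc, hzc2⟩, hminc⟩ := aMinc_spec comp hne
  obtain ⟨⟨zC, hzC, hzC2⟩, hmaxc⟩ := aMaxc_spec comp hne
  refine ⟨?_, ?_, ?_, ?_⟩
  · obtain ⟨w, hw1, hw2, hw3⟩ := w1
    have hwcomp : w ∈ comp := (hmem w).mpr ⟨hw1, hw2⟩
    have h1 := hminr w hwcomp
    have h2 := (hbound zr ((hmem zr).mp hzr).1 ((hmem zr).mp hzr).2).1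
    unfold infoOf parOf at *
    omega
  · obtain ⟨w, hw1, hw2, hw3⟩ := w2
    have hwcomp : w ∈ comp := (hmem w).mpr ⟨hw1, hw2⟩
    have h1 := hmaxr w hwcomp
    have h2 := (hbound zR ((hmem zR).mp hzR).1 ((hmem zR).mp hzR).2).2.1
    unfold infoOf parOf at *
    omega
  · obtain ⟨w, hw1, hw2, hw3⟩ := w3
    have hwcomp : w ∈ comp := (hmem w).mpr ⟨hw1, hw2⟩
    have h1 := hminc w hwcomp
    have h2 := (hbound zc ((hmem zc).mp hzc).1 ((hmem zc).mp hzc).2).2.2.1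
    unfold infoOf parOf at *
    omega
  · obtain ⟨w, hw1, hw2, hw3⟩ := w4
    have hwcomp : w ∈ comp := (hmem w).mpr ⟨hw1, hw2⟩
    have h1 := hmaxc w hwcomp
    have h2 := (hbound zC ((hmem zC).mp hzC).1 ((hmem zC).mp hzC).2).2.2.2
    unfold infoOf parOf at *
    omega

theorem draw_fold_char (g : List (List Int)) (rect : Int)
    (hPre : ∀ row ∈ g, (g.headD []).length ≤ row.length) :
    ∀ (comps : List (List (Int × Int))),
    (∀ C ∈ comps, ∃ sd, sd ∈ C ∧ ∀ z, z ∈ C ↔ Rct g rect z ∧ Conn g rect sd z) →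
    ∀ out, out.length = g.length →
    (∀ i : Nat, (out.getD i []).length = (g.getD i []).length) →
    (comps.foldl (pvDraw g rect) out).length = g.length ∧
    (∀ i : Nat, ((comps.foldl (pvDraw g rect) out).getD i []).length = (g.getD i []).length) ∧
    ∀ i j : Nat,
      ((∃ C ∈ comps, ∃ z, APaint C z ∧ z.1.toNat = i ∧ z.2.toNat = j) →
        pvCell (comps.foldl (pvDraw g rect) out) i j = 8) ∧
      ((¬ ∃ C ∈ comps, ∃ z, APaint C z ∧ z.1.toNat = i ∧ z.2.toNat = j) →
        pvCell (comps.foldl (pvDraw g rect) out) i j = pvCell out i j) := by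
  intro comps
  induction comps with
  | nil =>
    intro _ out h1 h2
    refine ⟨h1, h2, ?_⟩
    intro i j
    refine ⟨?_, fun _ => rfl⟩
    rintro ⟨C, hC, _⟩
    cases hC
  | cons C comps ihC =>
    intro hcomps out h1 h2
    rw [List.foldl_cons]
    obtain ⟨sd, hsd, hcls⟩ := hcomps C (by simp)
    obtain ⟨d1, d2, d3⟩ := pvDraw_char g rect C sd hsd hcls hPre out h1 h2
    obtain ⟨k1, k2, k3⟩ := ihC (fun C' hC' => hcomps C' (by simp [hC'])) (pvDraw g rect out C) d1 d2
    refine ⟨k1, k2, ?_⟩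
    intro i j
    constructor
    · rintro ⟨C', hC', z, hz, hci, hcj⟩
      rcases List.mem_cons.mp hC' with rfl | hC2
      · by_cases hrest : ∃ C' ∈ comps, ∃ z, APaint C' z ∧ z.1.toNat = i ∧ z.2.toNat = j
        · exact (k3 i j).1 hrest
        · rw [(k3 i j).2 hrest]
          exact (d3 i j).1 ⟨z, hz, hci, hcj⟩
      · exact (k3 i j).1 ⟨C', hC2, z, hz, hci, hcj⟩
    · intro hnone
      have hrest : ¬ ∃ C' ∈ comps, ∃ z, APaint C' z ∧ z.1.toNat = i ∧ z.2.toNat = j := by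
        rintro ⟨C', hC', z, hz, hci, hcj⟩
        exact hnone ⟨C', by simp [hC'], z, hz, hci, hcj⟩
      rw [(k3 i j).2 hrest]
      exact (d3 i j).2 (fun ⟨z, hz, hci, hcj⟩ => hnone ⟨C, by simp, z, hz, hci, hcj⟩)

theorem getD_in_range {α : Type} (xs : List α) (d : α) (i : Nat) (h : i < xs.length) :
    xs.getD i d = xs[i] := by
  rw [List.getD_eq_getElem?_getD, List.getElem?_eq_getElem h]
  rfl

theorem transform_some (g : List (List Int)) (rect : Int)
    (hne : ¬ (g = [] ∨ g.headD [] = []))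
    (hsel : (pvRectSel (pvCounts g (g.length : Int) ((g.headD []).length : Int)).items
      (pvAt g 0 0)).1 = some rect) :
    transform g = (pvComponents g (g.length : Int) ((g.headD []).length : Int) rect).foldl
      (pvDraw g rect) (g.map (fun row => row)) := by
  unfold transform
  rw [if_neg hne]
  simp only [hsel]

theorem main_branch (g : List (List Int)) (rect : Int)
    (hne : ¬ (g = [] ∨ g.headD [] = []))
    (hPre : ∀ row ∈ g, (g.headD []).length ≤ row.length)
    (hsel : (pvRectSel (pvCounts g (g.length : Int) ((g.headD []).length : Int)).items
      (pvAt g 0 0)).1 = some rect) :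
    transform g = transform_alt g := by
  rw [transform_some g rect hne hsel, transform_alt_some g rect hne hsel]
  have hmapid : g.map (fun row => row) = g := by simp
  rw [hmapid]
  obtain ⟨hcls, hcov⟩ := pvComponents_spec g rect
  obtain ⟨hAlen, hArow, hAcell⟩ := draw_fold_char g rect hPre
    (pvComponents g (g.length : Int) ((g.headD []).length : Int) rect) hcls g rfl
    (fun _ => rfl)
  rw [foldl_append_rows (PySem.List.pyRange 0 (g.length : Int) 1)
    (fun r => (PySem.List.pyRange 0 ((g.headD []).length : Int) 1).foldl
      (bRowStep g rect r (parOf g rect) (infoOf g rect)) (PySem.List.pyGetD g r [])) []]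
  rw [List.nil_append]
  have hBlen : ((PySem.List.pyRange 0 (g.length : Int) 1).map
      (fun r => (PySem.List.pyRange 0 ((g.headD []).length : Int) 1).foldl
        (bRowStep g rect r (parOf g rect) (infoOf g rect))
        (PySem.List.pyGetD g r []))).length = g.length := by
    rw [List.length_map, PySem.List.length_pyRange_one]
    simp
  apply List.ext_getElem (by rw [hAlen, hBlen])
  intro i hi1 hi2
  have hig : i < g.length := by rw [hAlen] at hi1; exact hi1
  have hiI : (i : Int) < (g.length : Int) := by exact_mod_cast hig
  have hBrow : ((PySem.List.pyRange 0 (g.length : Int) 1).map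
      (fun r => (PySem.List.pyRange 0 ((g.headD []).length : Int) 1).foldl
        (bRowStep g rect r (parOf g rect) (infoOf g rect))
        (PySem.List.pyGetD g r [])))[i] =
      (PySem.List.pyRange 0 ((g.headD []).length : Int) 1).foldl
        (bRowStep g rect (i : Int) (parOf g rect) (infoOf g rect))
        (PySem.List.pyGetD g (i : Int) []) := by
    rw [List.getElem_map]
    congr 1 <;> rw [PySem.List.getElem_pyRange_one] <;> simp
  rw [hBrow]
  obtain ⟨hrlen, hrcell⟩ := bRow_char g rect (i : Int) (by positivity) hiI hPre
  have hrownat : ((i : Int)).toNat = i := Int.toNat_natCast i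
  rw [hrownat] at hrlen hrcell
  have hAgetD : (((pvComponents g (g.length : Int) ((g.headD []).length : Int) rect).foldl
      (pvDraw g rect) g)).getD i [] =
      ((pvComponents g (g.length : Int) ((g.headD []).length : Int) rect).foldl
        (pvDraw g rect) g)[i] := getD_in_range _ [] i hi1
  apply List.ext_getElem (by rw [← hAgetD, hArow i, ← hrlen]; try rfl)
  intro j hj1 hj2
  have hjlen : j < (g.getD i []).length := by
    rw [← hAgetD, hArow i] at hj1
    exact hj1
  have hAcellget : ((pvComponents g (g.length : Int) ((g.headD []).length : Int) rect).foldl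
      (pvDraw g rect) g)[i][j] = pvCell ((pvComponents g (g.length : Int)
        ((g.headD []).length : Int) rect).foldl (pvDraw g rect) g) i j := by
    unfold pvCell
    rw [hAgetD, getD_in_range _ 0 j hj1]
  have hBcellget : ((PySem.List.pyRange 0 ((g.headD []).length : Int) 1).foldl
      (bRowStep g rect (i : Int) (parOf g rect) (infoOf g rect))
      (PySem.List.pyGetD g (i : Int) []))[j] =
      ((PySem.List.pyRange 0 ((g.headD []).length : Int) 1).foldl
        (bRowStep g rect (i : Int) (parOf g rect) (infoOf g rect))
        (PySem.List.pyGetD g (i : Int) [])).getD j 0 := (getD_in_range _ 0 j hj2).symm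
  rw [hAcellget, hBcellget]
  by_cases hCB : (j : Int) < ((g.headD []).length : Int) ∧ BPaint g rect (i : Int) (j : Int)
  · rw [(hrcell j).1 hCB]
    have hrct : Rct g rect ((i : Int), (j : Int)) :=
      ⟨by positivity, hiI, by positivity, hCB.1, hCB.2.1⟩
    obtain ⟨C, hC, hzC⟩ := hcov _ hrct
    obtain ⟨sd, hsd, hcls'⟩ := hcls C hC
    obtain ⟨e1, e2, e3, e4⟩ := bbox_eq g rect C sd hsd hcls' _ hzC
    apply (hAcell i j).1
    refine ⟨C, hC, ((i : Int), (j : Int)), ⟨hzC, ?_, ?_, ?_⟩, by simp, by simp⟩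
    · rw [e2, e1]
      exact hCB.2.2.1
    · rw [e4, e3]
      exact hCB.2.2.2.1
    · rcases hCB.2.2.2.2 with hcen | hcen
      · exact Or.inl (by rw [e1, e2]; exact hcen)
      · exact Or.inr (by rw [e3, e4]; exact hcen)
  · rw [(hrcell j).2 hCB]
    have hnA : ¬ ∃ C ∈ pvComponents g (g.length : Int) ((g.headD []).length : Int) rect,
        ∃ z, APaint C z ∧ z.1.toNat = i ∧ z.2.toNat = j := by
      rintro ⟨C, hC, z, ⟨hzC, b1, b2, bcen⟩, hci, hcj⟩
      obtain ⟨sd, hsd, hcls'⟩ := hcls C hC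
      have hzr : Rct g rect z := ((hcls' z).mp hzC).1
      have hz1 : z.1 = (i : Int) := by
        have := hzr.1
        omega
      have hz2 : z.2 = (j : Int) := by
        have := hzr.2.2.1
        omega
      have hzpair : z = ((i : Int), (j : Int)) := by
        rw [Prod.ext_iff]
        exact ⟨hz1, hz2⟩
      rw [hzpair] at hzC hzr
      obtain ⟨e1, e2, e3, e4⟩ := bbox_eq g rect C sd hsd hcls' _ hzC
      refine hCB ⟨by have := hzr.2.2.2.1; exact this, hzr.2.2.2.2, ?_, ?_, ?_⟩
      · rw [← e2, ← e1]
        exact b1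
      · rw [← e4, ← e3]
        exact b2
      · rw [hzpair] at bcen
        rcases bcen with hcen | hcen
        · exact Or.inl (by rw [← e1, ← e2]; exact hcen)
        · exact Or.inr (by rw [← e3, ← e4]; exact hcen)
    rw [(hAcell i j).2 hnA]
    unfold pvCell
    rfl

-- ===== VERDICT (by name: the statement is the Claim_ definition above) =====
theorem transform_spec : Claim_equal_transform := by
  unfold Claim_equal_transform Spec_transform
  intro g _ hpre
  by_cases hne : g = [] ∨ g.headD [] = []
  · unfold transform transform_alt
    rw [if_pos hne, if_pos hne]
  · rcases hsel : (pvRectSel (pvCounts g (g.length : Int) ((g.headD []).length : Int)).items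
        (pvAt g 0 0)).1 with _ | rect
    · unfold transform transform_alt
      rw [if_neg hne, if_neg hne]
      simp only [hsel]
    · exact main_branch g rect hne hpre hsel
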